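-- pv_equiv track=rewrite | github.com/okikusan-public/knowledge_graph | scripts/lint_graph.py | _cluster_duplicates
-- ===== SOURCE A (Python) =====
-- def _cluster_duplicates(pairs):
--     """Group duplicate pairs into connected clusters using union-find."""
--     parent = {}
--
--     def find(x):
--         while parent.get(x, x) != x:
--             parent[x] = parent.get(parent[x], parent[x])
--             x = parent[x]
--         return x
--
--     def union(a, b):
--         ra, rb = find(a), find(b)
--         if ra != rb:
--             parent[ra] = rb
--
--     for p in pairs:
--         union(p["name_a"], p["name_b"])
--
--     all_names = set()
--     for p in pairs:
--         all_names.add(p["name_a"])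
--         all_names.add(p["name_b"])
--
--     clusters = {}
--     for name in all_names:
--         root = find(name)
--         clusters.setdefault(root, set()).add(name)
--
--     return [sorted(members) for members in clusters.values()]
-- ===== SOURCE B (Python) =====
-- def _cluster_duplicates(pairs):
--     """Group duplicate pairs into connected clusters by merging component sets."""
--     comps = []  # disjoint sets of names, one per connected cluster
--     for p in pairs:
--         a, b = p["name_a"], p["name_b"]
--         ia = next((i for i, c in enumerate(comps) if a in c), None)
--         ib = next((i for i, c in enumerate(comps) if b in c), None)
--         if ia is None and ib is None:
--             comps.append({a, b})
--         elif ia is None: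
--             comps[ib].add(a)
--         elif ib is None:
--             comps[ia].add(b)
--         elif ia != ib:
--             comps[ia] |= comps[ib]
--             del comps[ib]
--
--     all_names = set()
--     for p in pairs:
--         all_names.add(p["name_a"])
--         all_names.add(p["name_b"])
--
--     result = []
--     emitted = set()
--     for name in all_names:
--         if name in emitted:
--             continue
--         for c in comps:
--             if name in c:
--                 emitted |= c
--                 result.append(sorted(c))
--                 break
--     return result
-- ===== Notes on version B (the rewrite author's own statement) =====
-- stated objective: alternative
-- what changed: Replaces A's mutating union-find (parent dict, find loops with path compression, then grouping by root) with direct merging of disjoint component sets while scanning the pairs, followed by one emission pass over the names; no parent pointers or find() exist in B.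
import Mathlib
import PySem

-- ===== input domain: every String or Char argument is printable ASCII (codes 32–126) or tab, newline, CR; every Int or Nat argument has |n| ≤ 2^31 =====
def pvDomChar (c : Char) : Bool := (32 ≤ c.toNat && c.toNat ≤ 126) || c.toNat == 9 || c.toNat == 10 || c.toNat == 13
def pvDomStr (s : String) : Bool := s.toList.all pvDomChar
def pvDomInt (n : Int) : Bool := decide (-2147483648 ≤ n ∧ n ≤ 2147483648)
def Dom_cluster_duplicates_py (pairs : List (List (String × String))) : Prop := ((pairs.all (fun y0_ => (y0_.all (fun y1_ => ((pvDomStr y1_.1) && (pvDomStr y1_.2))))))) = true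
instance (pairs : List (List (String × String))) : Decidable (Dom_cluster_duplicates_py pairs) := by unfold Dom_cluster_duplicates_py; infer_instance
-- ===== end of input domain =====

-- B replaces A's mutating union-find (parent dict + find loops with path compression) by direct
-- merging of disjoint component sets; same outputs, different algorithm (objective: alternative).

-- ===== PORT A =====

-- p["name_a"] / p["name_b"]: first-match lookup in the association list; Pre_ guarantees the key
-- is present, so the `.getD ""` default is never used on admitted inputs.
def pvKeyA (p : List (String × String)) : String := (p.lookup "name_a").getD ""
def pvKeyB (p : List (String × String)) : String := (p.lookup "name_b").getD ""

-- the body of A's `find` while-loop; fuel only makes the loop total (one unit per iteration,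
-- `parent.size + 1` is enough under the acyclicity invariant proved below)
def pvFindLoop : Nat → PySem.Dict String String → String → String × PySem.Dict String String
  | 0, parent, x => (x, parent)
  | fuel+1, parent, x =>
    if parent.getD x x = x then (x, parent)
    else
      let px := parent.getD x x
      let g := parent.getD px px
      let parent' := parent.insert x g
      pvFindLoop fuel parent' g

def pvFind (parent : PySem.Dict String String) (x : String) :
    String × PySem.Dict String String :=
  pvFindLoop (parent.size + 1) parent x

def pvUnion (parent : PySem.Dict String String) (a b : String) : PySem.Dict String String :=
  let ra := pvFind parent a
  let rb := pvFind ra.2 b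
  if ra.1 ≠ rb.1 then rb.2.insert ra.1 rb.1 else rb.2

def pvAllNames (pairs : List (List (String × String))) : PySem.Set String :=
  pairs.foldl (fun s p => PySem.Set.add (PySem.Set.add s (pvKeyA p)) (pvKeyB p)) PySem.Set.empty

def cluster_duplicates_py (pairs : List (List (String × String))) : List (List String) :=
  let parent := pairs.foldl (fun P p => pvUnion P (pvKeyA p) (pvKeyB p)) (PySem.Dict.mk [])
  let allNames := pvAllNames pairs
  let res := allNames.foldl
    (fun (st : PySem.Dict String String × PySem.Dict String (PySem.Set String)) name =>
      let fr := pvFind st.1 name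
      (fr.2, st.2.insert fr.1 (PySem.Set.add (st.2.getD fr.1 PySem.Set.empty) name)))
    (parent, PySem.Dict.mk [])
  res.2.values.map (fun members => PySem.List.sorted members (fun x => x) false)

-- ===== PORT B =====

-- first index i with a ∈ comps[i] (Python's `next((i for i, c in enumerate(comps) if a in c), None)`)
def pvFindComp (comps : List (PySem.Set String)) (a : String) : Option Nat :=
  comps.findIdx? (fun c => PySem.Set.contains c a)

def pvMergeStep (comps : List (PySem.Set String)) (p : List (String × String)) :
    List (PySem.Set String) :=
  let a := pvKeyA p
  let b := pvKeyB p
  match pvFindComp comps a, pvFindComp comps b with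
  | none, none => comps ++ [PySem.Set.add (PySem.Set.add PySem.Set.empty a) b]
  | none, some jb => comps.set jb (PySem.Set.add (comps.getD jb PySem.Set.empty) a)
  | some ja, none => comps.set ja (PySem.Set.add (comps.getD ja PySem.Set.empty) b)
  | some ja, some jb =>
    if ja ≠ jb then
      (comps.set ja (PySem.Set.union (comps.getD ja PySem.Set.empty) (comps.getD jb PySem.Set.empty))).eraseIdx jb
    else comps

def cluster_duplicates_py_alt (pairs : List (List (String × String))) : List (List String) :=
  let comps := pairs.foldl pvMergeStep []
  let allNames := pvAllNames pairs
  let res := allNames.foldl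
    (fun (st : PySem.Set String × List (List String)) name =>
      if PySem.Set.contains st.1 name then st
      else
        match comps.find? (fun c => PySem.Set.contains c name) with
        | some c => (PySem.Set.union st.1 c, st.2 ++ [PySem.List.sorted c (fun x => x) false])
        | none => st)
    (PySem.Set.empty, [])
  res.2

-- ===== PRECONDITION & SPEC =====
-- Pre_ excludes exactly the inputs where Python A raises KeyError: a pair dict lacking
-- key "name_a" or "name_b".
def Pre_cluster_duplicates_py (pairs : List (List (String × String))) : Prop :=
  ∀ p ∈ pairs, (p.lookup "name_a").isSome ∧ (p.lookup "name_b").isSome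
instance (pairs : List (List (String × String))) : Decidable (Pre_cluster_duplicates_py pairs) := by
  unfold Pre_cluster_duplicates_py; infer_instance

def pvWitness_cluster_duplicates_py : (List (List (String × String))) :=
  [[("name_a", "x"), ("name_b", "y")], [("name_a", "y"), ("name_b", "z")]]

def Spec_cluster_duplicates_py (pairs : List (List (String × String))) (out : List (List String)) : Prop := out = cluster_duplicates_py_alt pairs
instance (pairs : List (List (String × String))) (out : List (List String)) : Decidable (Spec_cluster_duplicates_py pairs out) := by unfold Spec_cluster_duplicates_py; infer_instance

-- ===== CLAIM (what is proved, stated in full; the proofs are below) =====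
def Claim_equal_cluster_duplicates_py : Prop := ∀ (pairs : List (List (String × String))), Dom_cluster_duplicates_py pairs → Pre_cluster_duplicates_py pairs → Spec_cluster_duplicates_py pairs (cluster_duplicates_py pairs)

-- ===== LEMMAS AND PROOFS =====

-- ---------- A-side: analysis of the parent forest ----------

def pvStep (P : PySem.Dict String String) (x : String) : String := P.getD x x

def pvChase (P : PySem.Dict String String) : Nat → String → String
  | 0, x => x
  | n+1, x => pvChase P n (pvStep P x)

def pvIsRoot (P : PySem.Dict String String) (x : String) : Prop := pvStep P x = x

def pvGood (P : PySem.Dict String String) : Prop :=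
  ∀ x, ∃ n, pvIsRoot P (pvChase P n x)

noncomputable def pvDD (P : PySem.Dict String String) (x : String) : Nat :=
  sInf {n | pvIsRoot P (pvChase P n x)}

noncomputable def pvRoot (P : PySem.Dict String String) (x : String) : String :=
  pvChase P (pvDD P x) x

lemma pvChase_succ (P : PySem.Dict String String) (n : Nat) (x : String) :
    pvChase P (n+1) x = pvStep P (pvChase P n x) := by
  induction n generalizing x with
  | zero => rfl
  | succ n ih => show pvChase P (n+1) (pvStep P x) = _; rw [ih]; rfl

lemma pvChase_of_isRoot {P : PySem.Dict String String} {x : String}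
    (h : pvIsRoot P x) (n : Nat) : pvChase P n x = x := by
  induction n with
  | zero => rfl
  | succ n ih => show pvChase P n (pvStep P x) = x; rw [h]; exact ih

lemma pvChase_add (P : PySem.Dict String String) (m n : Nat) (x : String) :
    pvChase P (m + n) x = pvChase P n (pvChase P m x) := by
  induction n with
  | zero => rfl
  | succ n ih => rw [← Nat.add_assoc, pvChase_succ, ih, ← pvChase_succ]

lemma pvStable {P : PySem.Dict String String} {x : String} {n m : Nat}
    (h : pvIsRoot P (pvChase P n x)) (hnm : n ≤ m) : pvChase P m x = pvChase P n x := by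
  have : m = n + (m - n) := by omega
  rw [this, pvChase_add]
  exact pvChase_of_isRoot h _

lemma pvDD_root {P : PySem.Dict String String} {x : String}
    (h : ∃ n, pvIsRoot P (pvChase P n x)) : pvIsRoot P (pvChase P (pvDD P x) x) :=
  Nat.sInf_mem h

lemma pvDD_min {P : PySem.Dict String String} {x : String} {n : Nat}
    (h : pvIsRoot P (pvChase P n x)) : pvDD P x ≤ n :=
  Nat.sInf_le h

lemma pvRoot_eq_of_chase_isRoot {P : PySem.Dict String String} {x : String} {n : Nat}
    (h : pvIsRoot P (pvChase P n x)) : pvRoot P x = pvChase P n x := by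
  rw [pvRoot, pvStable (pvDD_root ⟨n, h⟩) (pvDD_min h)]

lemma pvRoot_of_isRoot {P : PySem.Dict String String} {x : String}
    (h : pvIsRoot P x) : pvRoot P x = x :=
  pvRoot_eq_of_chase_isRoot (n := 0) h

lemma pvRoot_isRoot {P : PySem.Dict String String} (hG : pvGood P) (x : String) :
    pvIsRoot P (pvRoot P x) := by
  rw [pvRoot]; exact pvDD_root (hG x)

lemma pvDD_of_isRoot {P : PySem.Dict String String} {x : String}
    (h : pvIsRoot P x) : pvDD P x = 0 :=
  Nat.le_zero.mp (pvDD_min (n := 0) h)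

lemma pvIsRoot_of_dd_zero {P : PySem.Dict String String} (hG : pvGood P) {x : String}
    (h : pvDD P x = 0) : pvIsRoot P x := by
  have := pvDD_root (hG x); rwa [h] at this

lemma pvDD_step {P : PySem.Dict String String} (hG : pvGood P) {x : String}
    (hx : ¬ pvIsRoot P x) : pvDD P x = pvDD P (pvStep P x) + 1 := by
  have hle : pvDD P x ≤ pvDD P (pvStep P x) + 1 := by
    apply pvDD_min
    rw [show pvDD P (pvStep P x) + 1 = 1 + pvDD P (pvStep P x) by omega, pvChase_add]
    exact pvDD_root (hG (pvStep P x))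
  have hpos : 0 < pvDD P x := by
    rcases Nat.eq_zero_or_pos (pvDD P x) with h | h
    · exact absurd (pvIsRoot_of_dd_zero hG h) hx
    · exact h
  have hge : pvDD P (pvStep P x) + 1 ≤ pvDD P x := by
    obtain ⟨k, hk⟩ : ∃ k, pvDD P x = k + 1 := ⟨pvDD P x - 1, by omega⟩
    have := pvDD_root (hG x)
    rw [hk] at this
    have : pvIsRoot P (pvChase P k (pvStep P x)) := this
    have := pvDD_min this
    omega
  omega

lemma pvRoot_step {P : PySem.Dict String String} (hG : pvGood P) (x : String) :
    pvRoot P x = pvRoot P (pvStep P x) := by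
  by_cases hx : pvIsRoot P x
  · rw [hx]
  · rw [pvRoot, pvDD_step hG hx]
    rfl

lemma pvDD_chase {P : PySem.Dict String String} (hG : pvGood P) {x : String} {k : Nat}
    (hk : k ≤ pvDD P x) : pvDD P (pvChase P k x) = pvDD P x - k := by
  induction k generalizing x with
  | zero => rfl
  | succ k ih =>
    have hx : ¬ pvIsRoot P x := by
      intro h; rw [pvDD_of_isRoot h] at hk; omega
    have hs := pvDD_step hG hx
    have : pvChase P (k+1) x = pvChase P k (pvStep P x) := rfl
    rw [this, ih (by omega)]
    omega

lemma pvStep_insert (P : PySem.Dict String String) (u v y : String) :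
    pvStep (P.insert u v) y = if y = u then v else pvStep P y := by
  by_cases h : y = u
  · subst h; rw [if_pos rfl, pvStep, PySem.Dict.getD_insert_self]
  · rw [if_neg h, pvStep, pvStep, PySem.Dict.getD_insert_of_ne _ _ _ h]

lemma pvKey_of_not_isRoot {P : PySem.Dict String String} {x : String}
    (h : ¬ pvIsRoot P x) : x ∈ P.keys := by
  by_contra hmem
  exact h (by simp [pvIsRoot, pvStep, PySem.Dict.getD,
    (PySem.Dict.get?_eq_none_iff_not_mem_keys P x).mpr hmem])

-- path compression (insert u ↦ v with v on u's path) preserves roots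
lemma pvComp_aux {P : PySem.Dict String String} {u v : String} (hG : pvGood P)
    (hu : ¬ pvIsRoot P u) (hv : pvRoot P v = pvRoot P u) (hlt : pvDD P v < pvDD P u) :
    ∀ d y, pvDD P y ≤ d → ∃ n, pvChase (P.insert u v) n y = pvRoot P y ∧
      pvIsRoot (P.insert u v) (pvChase (P.insert u v) n y) := by
  intro d
  induction d with
  | zero =>
    intro y hy
    have hyr : pvIsRoot P y := pvIsRoot_of_dd_zero hG (by omega)
    have hyu : y ≠ u := fun h => hu (h ▸ hyr)
    have hstep : pvStep (P.insert u v) y = y := by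
      rw [pvStep_insert, if_neg hyu]; exact hyr
    exact ⟨0, pvRoot_of_isRoot hyr |>.symm ▸ rfl, hstep⟩
  | succ d ih =>
    intro y hy
    by_cases hyr : pvIsRoot P y
    · have hyu : y ≠ u := fun h => hu (h ▸ hyr)
      have hstep : pvStep (P.insert u v) y = y := by
        rw [pvStep_insert, if_neg hyu]; exact hyr
      exact ⟨0, pvRoot_of_isRoot hyr |>.symm ▸ rfl, hstep⟩
    · by_cases hyu : y = u
      · subst hyu
        obtain ⟨n, h1, h2⟩ := ih v (by omega)
        refine ⟨n + 1, ?_, ?_⟩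
        · show pvChase (P.insert y v) n (pvStep (P.insert y v) y) = _
          rw [pvStep_insert, if_pos rfl, h1, hv]
        · show pvIsRoot _ (pvChase (P.insert y v) n (pvStep (P.insert y v) y))
          rw [pvStep_insert, if_pos rfl]; exact h2
      · have hdd := pvDD_step hG hyr
        obtain ⟨n, h1, h2⟩ := ih (pvStep P y) (by omega)
        refine ⟨n + 1, ?_, ?_⟩
        · show pvChase (P.insert u v) n (pvStep (P.insert u v) y) = _
          rw [pvStep_insert, if_neg hyu, h1, ← pvRoot_step hG]
        · show pvIsRoot _ (pvChase (P.insert u v) n (pvStep (P.insert u v) y))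
          rw [pvStep_insert, if_neg hyu]; exact h2

lemma pvComp {P : PySem.Dict String String} {u v : String} (hG : pvGood P)
    (hu : ¬ pvIsRoot P u) (hv : pvRoot P v = pvRoot P u) (hlt : pvDD P v < pvDD P u) :
    pvGood (P.insert u v) ∧ ∀ y, pvRoot (P.insert u v) y = pvRoot P y := by
  constructor
  · intro y
    obtain ⟨n, _, h2⟩ := pvComp_aux hG hu hv hlt (pvDD P y) y le_rfl
    exact ⟨n, h2⟩
  · intro y
    obtain ⟨n, h1, h2⟩ := pvComp_aux hG hu hv hlt (pvDD P y) y le_rfl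
    rw [pvRoot_eq_of_chase_isRoot h2, h1]

-- union (insert root ra ↦ root rb) merges exactly the two root classes
lemma pvUni_aux {P : PySem.Dict String String} {ra rb : String} (hG : pvGood P)
    (hra : pvIsRoot P ra) (hrb : pvIsRoot P rb) (hne : ra ≠ rb) :
    ∀ d y, pvDD P y ≤ d → ∃ n,
      pvChase (P.insert ra rb) n y = (if pvRoot P y = ra then rb else pvRoot P y) ∧
      pvIsRoot (P.insert ra rb) (pvChase (P.insert ra rb) n y) := by
  have hrootcase : ∀ y, pvIsRoot P y → ∃ n,
      pvChase (P.insert ra rb) n y = (if pvRoot P y = ra then rb else pvRoot P y) ∧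
      pvIsRoot (P.insert ra rb) (pvChase (P.insert ra rb) n y) := by
    intro y hyr
    have hstep_rb : pvIsRoot (P.insert ra rb) rb := by
      show pvStep _ _ = _
      rw [pvStep_insert, if_neg (Ne.symm hne)]; exact hrb
    by_cases hyra : y = ra
    · subst hyra
      refine ⟨1, ?_, ?_⟩
      · show pvChase (P.insert y rb) 0 (pvStep (P.insert y rb) y) = _
        rw [pvStep_insert, if_pos rfl, pvRoot_of_isRoot hyr, if_pos rfl]; rfl
      · show pvIsRoot _ (pvChase (P.insert y rb) 0 (pvStep (P.insert y rb) y))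
        rw [pvStep_insert, if_pos rfl]; exact hstep_rb
    · have hstep : pvStep (P.insert ra rb) y = y := by
        rw [pvStep_insert, if_neg hyra]; exact hyr
      refine ⟨0, ?_, hstep⟩
      rw [pvRoot_of_isRoot hyr, if_neg hyra]; rfl
  intro d
  induction d with
  | zero =>
    intro y hy
    exact hrootcase y (pvIsRoot_of_dd_zero hG (by omega))
  | succ d ih =>
    intro y hy
    by_cases hyr : pvIsRoot P y
    · exact hrootcase y hyr
    · have hyra : y ≠ ra := fun h => hyr (h ▸ hra)
      have hdd := pvDD_step hG hyr
      obtain ⟨n, h1, h2⟩ := ih (pvStep P y) (by omega)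
      refine ⟨n + 1, ?_, ?_⟩
      · show pvChase (P.insert ra rb) n (pvStep (P.insert ra rb) y) = _
        rw [pvStep_insert, if_neg hyra, h1, ← pvRoot_step hG]
      · show pvIsRoot _ (pvChase (P.insert ra rb) n (pvStep (P.insert ra rb) y))
        rw [pvStep_insert, if_neg hyra]; exact h2

lemma pvUni {P : PySem.Dict String String} {ra rb : String} (hG : pvGood P)
    (hra : pvIsRoot P ra) (hrb : pvIsRoot P rb) (hne : ra ≠ rb) :
    pvGood (P.insert ra rb) ∧
    ∀ y, pvRoot (P.insert ra rb) y = (if pvRoot P y = ra then rb else pvRoot P y) := by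
  constructor
  · intro y
    obtain ⟨n, _, h2⟩ := pvUni_aux hG hra hrb hne (pvDD P y) y le_rfl
    exact ⟨n, h2⟩
  · intro y
    obtain ⟨n, h1, h2⟩ := pvUni_aux hG hra hrb hne (pvDD P y) y le_rfl
    rw [pvRoot_eq_of_chase_isRoot h2, h1]

lemma pvChase_insert_eq {P : PySem.Dict String String} {u v g : String} (hG : pvGood P)
    (hu : ¬ pvIsRoot P u) (hdl : pvDD P g < pvDD P u) :
    ∀ k, k ≤ pvDD P g → pvChase (P.insert u v) k g = pvChase P k g := by
  intro k
  induction k with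
  | zero => intro _; rfl
  | succ k ih =>
    intro hk
    have he := ih (by omega)
    have hne : pvChase P k g ≠ u := by
      intro h
      have := pvDD_chase hG (x := g) (k := k) (by omega)
      rw [h] at this
      omega
    rw [pvChase_succ, he, pvStep_insert, if_neg hne, ← pvChase_succ]

lemma pvDD_insert_le {P : PySem.Dict String String} {u v g : String} (hG : pvGood P)
    (hu : ¬ pvIsRoot P u) (hdl : pvDD P g < pvDD P u) :
    pvDD (P.insert u v) g ≤ pvDD P g := by
  have hroot : pvIsRoot P (pvChase P (pvDD P g) g) := pvDD_root (hG g)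
  have hne : pvChase P (pvDD P g) g ≠ u := fun h => hu (h ▸ hroot)
  apply pvDD_min
  rw [pvChase_insert_eq hG hu hdl _ le_rfl]
  show pvStep _ _ = _
  rw [pvStep_insert, if_neg hne]
  exact hroot

lemma pvKeys_length_eq_size (P : PySem.Dict String String) : P.keys.length = P.size := by
  simp [PySem.Dict.keys, PySem.Dict.size]

lemma pvDD_le_size {P : PySem.Dict String String} (hG : pvGood P)
    (hnd : P.keys.Nodup) (x : String) : pvDD P x ≤ P.size := by
  classical
  set d := pvDD P x with hd
  set l := (List.range d).map (fun k => pvChase P k x) with hl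
  have hnodup : l.Nodup := by
    refine List.Nodup.map_on ?_ (List.nodup_range)
    intro i hi j hj hij
    rw [List.mem_range] at hi hj
    have h1 := pvDD_chase hG (x := x) (k := i) (by omega)
    have h2 := pvDD_chase hG (x := x) (k := j) (by omega)
    rw [hij] at h1
    omega
  have hsub : l ⊆ P.keys := by
    intro y hy
    rw [hl, List.mem_map] at hy
    obtain ⟨k, hk, rfl⟩ := hy
    rw [List.mem_range] at hk
    apply pvKey_of_not_isRoot
    intro hroot
    have := pvDD_chase hG (x := x) (k := k) (by omega)
    rw [pvDD_of_isRoot hroot] at this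
    omega
  have hlen : l.length = d := by simp [hl]
  have : l.length ≤ P.keys.length := by
    calc l.length = l.toFinset.card := (List.toFinset_card_of_nodup hnodup).symm
    _ ≤ P.keys.toFinset.card := Finset.card_le_card (by
        intro y hy; rw [List.mem_toFinset] at *; exact hsub hy)
    _ ≤ P.keys.length := P.keys.toFinset_card_le
  rw [hlen, pvKeys_length_eq_size] at this
  exact this

lemma pvFindLoop_spec : ∀ (fuel : Nat) (P : PySem.Dict String String) (x : String),
    pvGood P → P.keys.Nodup → pvDD P x < fuel →
    (pvFindLoop fuel P x).1 = pvRoot P x ∧ pvGood (pvFindLoop fuel P x).2 ∧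
    (pvFindLoop fuel P x).2.keys.Nodup ∧
    ∀ y, pvRoot (pvFindLoop fuel P x).2 y = pvRoot P y := by
  intro fuel
  induction fuel with
  | zero => intro P x _ _ h; omega
  | succ fuel ih =>
    intro P x hG hnd hfuel
    by_cases hr : P.getD x x = x
    · rw [pvFindLoop, if_pos hr]
      exact ⟨(pvRoot_of_isRoot hr).symm, hG, hnd, fun _ => rfl⟩
    · rw [pvFindLoop, if_neg hr]
      have hu : ¬ pvIsRoot P x := hr
      have hgdef : P.getD (P.getD x x) (P.getD x x) = pvStep P (pvStep P x) := rfl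
      set g := pvStep P (pvStep P x) with hgg
      have hddx := pvDD_step hG hu
      have hlt : pvDD P g < pvDD P x := by
        by_cases hpx : pvIsRoot P (pvStep P x)
        · have : g = pvStep P x := hpx
          rw [this]; omega
        · have := pvDD_step hG hpx
          rw [hgg] at *
          omega
      have hv : pvRoot P g = pvRoot P x := by
        rw [← pvRoot_step hG, ← pvRoot_step hG]
      obtain ⟨hG', hroots'⟩ := pvComp hG hu hv hlt
      have hnd' : (P.insert x g).keys.Nodup := PySem.Dict.nodup_keys_insert _ _ _ hnd
      have hddg' : pvDD (P.insert x g) g < fuel := by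
        have h1 := pvDD_insert_le (v := g) hG hu hlt
        omega
      obtain ⟨r1, r2, r3, r4⟩ := ih (P.insert x g) g hG' hnd' hddg'
      simp only [hgdef]
      refine ⟨?_, r2, r3, ?_⟩
      · rw [r1, hroots' g, hv]
      · intro y; rw [r4 y, hroots' y]
  
lemma pvFind_spec {P : PySem.Dict String String} (hG : pvGood P) (hnd : P.keys.Nodup)
    (x : String) :
    (pvFind P x).1 = pvRoot P x ∧ pvGood (pvFind P x).2 ∧ (pvFind P x).2.keys.Nodup ∧
    ∀ y, pvRoot (pvFind P x).2 y = pvRoot P y := by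
  apply pvFindLoop_spec
  · exact hG
  · exact hnd
  · have := pvDD_le_size hG hnd x; omega

lemma pvRoot_root {P : PySem.Dict String String} (hG : pvGood P) (x : String) :
    pvRoot P (pvRoot P x) = pvRoot P x :=
  pvRoot_of_isRoot (pvRoot_isRoot hG x)

lemma pvUnion_spec {P : PySem.Dict String String} (hG : pvGood P) (hnd : P.keys.Nodup)
    (a b : String) :
    pvGood (pvUnion P a b) ∧ (pvUnion P a b).keys.Nodup ∧
    ∀ y, pvRoot (pvUnion P a b) y =
      (if pvRoot P y = pvRoot P a then pvRoot P b else pvRoot P y) := by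
  obtain ⟨f1, f2, f3, f4⟩ := pvFind_spec hG hnd a
  obtain ⟨g1, g2, g3, g4⟩ := pvFind_spec f2 f3 b
  rw [pvUnion]
  by_cases hne : (pvFind P a).1 ≠ (pvFind (pvFind P a).2 b).1
  · rw [if_pos hne]
    have hra : pvIsRoot (pvFind (pvFind P a).2 b).2 (pvFind P a).1 := by
      have : pvRoot (pvFind (pvFind P a).2 b).2 (pvFind P a).1 = (pvFind P a).1 := by
        rw [g4, f4, f1, pvRoot_root hG]
      rw [← this]; exact pvRoot_isRoot g2 _
    have hrb : pvIsRoot (pvFind (pvFind P a).2 b).2 (pvFind (pvFind P a).2 b).1 := by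
      have : pvRoot (pvFind (pvFind P a).2 b).2 (pvFind (pvFind P a).2 b).1
          = (pvFind (pvFind P a).2 b).1 := by
        simp only [g4, g1, f4]
        exact pvRoot_root hG b
      rw [← this]; exact pvRoot_isRoot g2 _
    obtain ⟨hGu, hrootsu⟩ := pvUni g2 hra hrb hne
    refine ⟨hGu, PySem.Dict.nodup_keys_insert _ _ _ g3, ?_⟩
    intro y
    rw [hrootsu y]
    simp only [g4, f4, f1, g1]
  · rw [if_neg hne]
    rw [not_not] at hne
    rw [f1, g1, f4] at hne
    refine ⟨g2, g3, ?_⟩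
    intro y
    rw [g4, f4]
    by_cases h : pvRoot P y = pvRoot P a
    · rw [if_pos h, h, hne]
    · rw [if_neg h]

-- ---------- connectivity generated by the pair list ----------

def pvEdges (pairs : List (List (String × String))) : List (String × String) :=
  pairs.map (fun p => (pvKeyA p, pvKeyB p))

def pvConn (E : List (String × String)) (x y : String) : Prop :=
  Relation.EqvGen (fun a b => (a, b) ∈ E) x y

lemma pvConn_refl (E : List (String × String)) (x : String) : pvConn E x x :=
  Relation.EqvGen.refl x

lemma pvConn_symm {E : List (String × String)} {x y : String} (h : pvConn E x y) :
    pvConn E y x := Relation.EqvGen.symm x y h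

lemma pvConn_trans {E : List (String × String)} {x y z : String}
    (h1 : pvConn E x y) (h2 : pvConn E y z) : pvConn E x z :=
  Relation.EqvGen.trans x y z h1 h2

lemma pvConn_mono {E E' : List (String × String)} {x y : String} (h : pvConn E x y) :
    pvConn (E ++ E') x y :=
  Relation.EqvGen.mono (fun a b hab => List.mem_append_left _ hab) h

lemma pvConn_nil {x y : String} : pvConn [] x y ↔ x = y := by
  constructor
  · intro h
    induction h with
    | rel a b hab => exact absurd hab (List.not_mem_nil)
    | refl a => rfl
    | symm a b _ ih => exact ih.symm
    | trans a b c _ _ ih1 ih2 => exact ih1.trans ih2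
  · rintro rfl; exact pvConn_refl _ _

lemma pvConn_snoc {E : List (String × String)} {a b x y : String} :
    pvConn (E ++ [(a, b)]) x y ↔
      pvConn E x y ∨ (pvConn E x a ∧ pvConn E b y) ∨ (pvConn E x b ∧ pvConn E a y) := by
  constructor
  · intro h
    induction h with
    | rel u v huv =>
      rcases List.mem_append.mp huv with h | h
      · exact Or.inl (Relation.EqvGen.rel _ _ h)
      · simp only [List.mem_singleton, Prod.mk.injEq] at h
        obtain ⟨rfl, rfl⟩ := h
        exact Or.inr (Or.inl ⟨pvConn_refl _ _, pvConn_refl _ _⟩)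
    | refl u => exact Or.inl (pvConn_refl _ _)
    | symm u v _ ih =>
      rcases ih with h | ⟨h1, h2⟩ | ⟨h1, h2⟩
      · exact Or.inl (pvConn_symm h)
      · exact Or.inr (Or.inr ⟨pvConn_symm h2, pvConn_symm h1⟩)
      · exact Or.inr (Or.inl ⟨pvConn_symm h2, pvConn_symm h1⟩)
    | trans u v w _ _ ih1 ih2 =>
      rcases ih1 with h1 | ⟨h1a, h1b⟩ | ⟨h1a, h1b⟩ <;>
        rcases ih2 with h2 | ⟨h2a, h2b⟩ | ⟨h2a, h2b⟩
      · exact Or.inl (pvConn_trans h1 h2)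
      · exact Or.inr (Or.inl ⟨pvConn_trans h1 h2a, h2b⟩)
      · exact Or.inr (Or.inr ⟨pvConn_trans h1 h2a, h2b⟩)
      · exact Or.inr (Or.inl ⟨h1a, pvConn_trans h1b h2⟩)
      · exact Or.inl (pvConn_trans (pvConn_trans h1a (pvConn_symm h2a))
          (pvConn_trans (pvConn_symm h1b) h2b))
      · exact Or.inl (pvConn_trans h1a h2b)
      · exact Or.inr (Or.inr ⟨h1a, pvConn_trans h1b h2⟩)
      · exact Or.inl (pvConn_trans h1a h2b)
      · exact Or.inl (pvConn_trans (pvConn_trans h1a (pvConn_symm h2a))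
          (pvConn_trans (pvConn_symm h1b) h2b))
  · intro h
    have hnew : pvConn (E ++ [(a, b)]) a b :=
      Relation.EqvGen.rel _ _ (List.mem_append_right _ (List.mem_singleton.mpr rfl))
    rcases h with h | ⟨h1, h2⟩ | ⟨h1, h2⟩
    · exact pvConn_mono h
    · exact pvConn_trans (pvConn_trans (pvConn_mono h1) hnew) (pvConn_mono h2)
    · exact pvConn_trans (pvConn_trans (pvConn_mono h1) (pvConn_symm hnew)) (pvConn_mono h2)

lemma pvConn_mem {E : List (String × String)} {x y : String} (h : pvConn E x y) :
    x = y ∨ ((∃ e ∈ E, x = e.1 ∨ x = e.2) ∧ (∃ e ∈ E, y = e.1 ∨ y = e.2)) := by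
  induction h with
  | rel u v huv => exact Or.inr ⟨⟨(u, v), huv, Or.inl rfl⟩, ⟨(u, v), huv, Or.inr rfl⟩⟩
  | refl u => exact Or.inl rfl
  | symm u v _ ih =>
    rcases ih with h | ⟨h1, h2⟩
    · exact Or.inl h.symm
    · exact Or.inr ⟨h2, h1⟩
  | trans u v w _ _ ih1 ih2 =>
    rcases ih1 with h1 | ⟨h1a, h1b⟩
    · rw [h1]; exact ih2
    · rcases ih2 with h2 | ⟨h2a, h2b⟩
      · rw [← h2]; exact Or.inr ⟨h1a, h1b⟩
      · exact Or.inr ⟨h1a, h2b⟩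

-- ---------- the union fold computes the connectivity classes ----------

def pvRootIff (P : PySem.Dict String String) (E : List (String × String)) : Prop :=
  ∀ x y, pvRoot P x = pvRoot P y ↔ pvConn E x y

lemma pvRootIff_union {P : PySem.Dict String String} {E : List (String × String)}
    (hG : pvGood P) (hnd : P.keys.Nodup) (hRI : pvRootIff P E) (a b : String) :
    pvRootIff (pvUnion P a b) (E ++ [(a, b)]) := by
  obtain ⟨_, _, hroots⟩ := pvUnion_spec hG hnd a b
  intro x y
  rw [hroots x, hroots y, pvConn_snoc]
  by_cases hx : pvRoot P x = pvRoot P a <;> by_cases hy : pvRoot P y = pvRoot P a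
  · rw [if_pos hx, if_pos hy]
    simp only [true_iff, eq_self_iff_true]
    exact Or.inl ((hRI x y).mp (hx.trans hy.symm))
  · rw [if_pos hx, if_neg hy]
    constructor
    · intro h
      exact Or.inr (Or.inl ⟨(hRI x a).mp hx, (hRI b y).mp h⟩)
    · rintro (h | ⟨h1, h2⟩ | ⟨h1, h2⟩)
      · exact absurd (((hRI y a).mpr (pvConn_trans (pvConn_symm h) ((hRI x a).mp hx)))) hy
      · exact (hRI b y).mpr h2
      · exact absurd ((hRI y a).mpr (pvConn_symm h2)) hy
  · rw [if_neg hx, if_pos hy]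
    constructor
    · intro h
      exact Or.inr (Or.inr ⟨(hRI x b).mp h, (hRI a y).mp hy.symm⟩)
    · rintro (h | ⟨h1, h2⟩ | ⟨h1, h2⟩)
      · exact absurd ((hRI x a).mpr (pvConn_trans h ((hRI y a).mp hy))) hx
      · exact absurd ((hRI x a).mpr h1) hx
      · exact (hRI x b).mpr h1
  · rw [if_neg hx, if_neg hy]
    rw [hRI x y]
    constructor
    · exact Or.inl
    · rintro (h | ⟨h1, h2⟩ | ⟨h1, h2⟩)
      · exact h
      · exact absurd ((hRI x a).mpr h1) hx
      · exact absurd ((hRI y a).mpr (pvConn_symm h2)) hy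

lemma pvStep_empty (x : String) : pvStep (PySem.Dict.mk []) x = x := by
  have : ¬ x ∈ (PySem.Dict.mk ([] : List (String × String))).keys := by
    simp [PySem.Dict.keys]
  simp [pvStep, PySem.Dict.getD,
    (PySem.Dict.get?_eq_none_iff_not_mem_keys _ x).mpr this]

lemma pvFoldA (pairs : List (List (String × String))) :
    pvGood (pairs.foldl (fun P p => pvUnion P (pvKeyA p) (pvKeyB p)) (PySem.Dict.mk [])) ∧
    (pairs.foldl (fun P p => pvUnion P (pvKeyA p) (pvKeyB p)) (PySem.Dict.mk [])).keys.Nodup ∧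
    pvRootIff (pairs.foldl (fun P p => pvUnion P (pvKeyA p) (pvKeyB p)) (PySem.Dict.mk []))
      (pvEdges pairs) := by
  induction pairs using List.reverseRecOn with
  | nil =>
    simp only [List.foldl_nil]
    refine ⟨fun x => ⟨0, pvStep_empty x⟩, by simp [PySem.Dict.keys], ?_⟩
    intro x y
    rw [pvRoot_of_isRoot (pvStep_empty x), pvRoot_of_isRoot (pvStep_empty y)]
    have : pvEdges ([] : List (List (String × String))) = [] := rfl
    rw [this]
    exact pvConn_nil.symm
  | append_singleton pairs p ih =>
    obtain ⟨hG, hnd, hRI⟩ := ih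
    rw [List.foldl_append]
    simp only [List.foldl_cons, List.foldl_nil]
    obtain ⟨hG', hnd', _⟩ := pvUnion_spec hG hnd (pvKeyA p) (pvKeyB p)
    refine ⟨hG', hnd', ?_⟩
    have := pvRootIff_union hG hnd hRI (pvKeyA p) (pvKeyB p)
    have hE : pvEdges (pairs ++ [p]) = pvEdges pairs ++ [(pvKeyA p, pvKeyB p)] := by
      simp [pvEdges]
    rw [hE]
    exact this

-- ---------- A: the clustering fold ----------

lemma pvDict_getD_empty {ν : Type} (r : String) (d : ν) :
    (PySem.Dict.mk ([] : List (String × ν))).getD r d = d := by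
  have : ¬ r ∈ (PySem.Dict.mk ([] : List (String × ν))).keys := by simp [PySem.Dict.keys]
  simp [PySem.Dict.getD, (PySem.Dict.get?_eq_none_iff_not_mem_keys _ r).mpr this]

lemma pvClusterFold (ns : List String) :
    ∀ (P : PySem.Dict String String) (C : PySem.Dict String (PySem.Set String)),
    pvGood P → P.keys.Nodup →
    (ns.foldl (fun st name =>
        let fr := pvFind st.1 name
        (fr.2, st.2.insert fr.1 (PySem.Set.add (st.2.getD fr.1 PySem.Set.empty) name)))
      (P, C)).2
    = ns.foldl (fun C n =>
        C.insert (pvRoot P n) (PySem.Set.add (C.getD (pvRoot P n) PySem.Set.empty) n)) C := by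
  induction ns with
  | nil => intro P C _ _; rfl
  | cons n ns ih =>
    intro P C hG hnd
    obtain ⟨f1, f2, f3, f4⟩ := pvFind_spec hG hnd n
    have hfun : pvRoot (pvFind P n).2 = pvRoot P := funext f4
    show (ns.foldl _ ((pvFind P n).2,
        C.insert (pvFind P n).1 (PySem.Set.add (C.getD (pvFind P n).1 PySem.Set.empty) n))).2 = _
    rw [ih _ _ f2 f3, hfun, f1]
    rfl

lemma pvEmitA_getD (f : String → String) (ns : List String) :
    ∀ (C : PySem.Dict String (PySem.Set String)) (r : String),
    (ns.foldl (fun C n =>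
        C.insert (f n) (PySem.Set.add (C.getD (f n) PySem.Set.empty) n)) C).getD r PySem.Set.empty
    = PySem.Set.update (C.getD r PySem.Set.empty) (ns.filter (fun n => f n == r)) := by
  induction ns with
  | nil => intro C r; rfl
  | cons n ns ih =>
    intro C r
    simp only [List.foldl_cons, List.filter_cons]
    by_cases h : f n = r
    · subst h
      rw [if_pos (by simp), ih, PySem.Dict.getD_insert_self]
      rfl
    · rw [if_neg (by simp [h]), ih, PySem.Dict.getD_insert_of_ne _ _ _ (Ne.symm h)]

lemma pvAllNames_mem_aux : ∀ (pairs : List (List (String × String))) (s : PySem.Set String)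
    (x : String),
    x ∈ pairs.foldl (fun s p => PySem.Set.add (PySem.Set.add s (pvKeyA p)) (pvKeyB p)) s ↔
    x ∈ s ∨ ∃ e ∈ pvEdges pairs, x = e.1 ∨ x = e.2 := by
  intro pairs
  induction pairs with
  | nil => intro s x; simp [pvEdges]
  | cons p pairs ih =>
    intro s x
    simp only [List.foldl_cons]
    rw [ih, PySem.Set.mem_add, PySem.Set.mem_add]
    simp only [pvEdges, List.map_cons, List.mem_cons]
    constructor
    · rintro (((h | h) | h) | ⟨e, he, hx⟩)
      · exact Or.inl h
      · exact Or.inr ⟨(pvKeyA p, pvKeyB p), Or.inl rfl, Or.inl h⟩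
      · exact Or.inr ⟨(pvKeyA p, pvKeyB p), Or.inl rfl, Or.inr h⟩
      · exact Or.inr ⟨e, Or.inr he, hx⟩
    · rintro (h | ⟨e, (rfl | he), hx⟩)
      · exact Or.inl (Or.inl (Or.inl h))
      · rcases hx with h | h
        · exact Or.inl (Or.inl (Or.inr h))
        · exact Or.inl (Or.inr h)
      · exact Or.inr ⟨e, he, hx⟩

lemma pvAllNames_mem (pairs : List (List (String × String))) (x : String) :
    x ∈ pvAllNames pairs ↔ ∃ e ∈ pvEdges pairs, x = e.1 ∨ x = e.2 := by
  rw [pvAllNames, pvAllNames_mem_aux]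
  simp [PySem.Set.empty]

lemma pvConn_of_not_endpoint {E : List (String × String)} {a : String}
    (ha : ¬ ∃ e ∈ E, a = e.1 ∨ a = e.2) (z : String) : pvConn E z a ↔ z = a := by
  constructor
  · intro h
    rcases pvConn_mem h with h | ⟨_, h2⟩
    · exact h
    · exact absurd h2 ha
  · rintro rfl; exact pvConn_refl _ _

lemma pvConn_snoc_self {E : List (String × String)} {a b : String} (h : pvConn E a b)
    (x y : String) : pvConn (E ++ [(a, b)]) x y ↔ pvConn E x y := by
  rw [pvConn_snoc]
  constructor
  · rintro (h' | ⟨h1, h2⟩ | ⟨h1, h2⟩)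
    · exact h'
    · exact pvConn_trans (pvConn_trans h1 h) h2
    · exact pvConn_trans (pvConn_trans h1 (pvConn_symm h)) h2
  · exact Or.inl

-- ---------- B: the component-merge fold ----------

def pvTouched (comps : List (PySem.Set String)) (x : String) : Prop := ∃ c ∈ comps, x ∈ c

def pvCompsInv (comps : List (PySem.Set String)) (E : List (String × String)) : Prop :=
  (∀ c ∈ comps, c ≠ [] ∧ c.Nodup) ∧
  (∀ i j (hi : i < comps.length) (hj : j < comps.length), i ≠ j →
     ∀ x, x ∈ comps[i] → x ∉ comps[j]) ∧
  (∀ x, pvTouched comps x ↔ ∃ e ∈ E, x = e.1 ∨ x = e.2) ∧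
  (∀ x y, (∃ c ∈ comps, x ∈ c ∧ y ∈ c) ↔
     (pvConn E x y ∧ pvTouched comps x ∧ pvTouched comps y))

lemma pvFindComp_some {comps : List (PySem.Set String)} {x : String} {j : Nat}
    (h : pvFindComp comps x = some j) : ∃ hj : j < comps.length, x ∈ comps[j] := by
  rw [pvFindComp, List.findIdx?_eq_some_iff_findIdx_eq] at h
  obtain ⟨hj, hidx⟩ := h
  refine ⟨hj, ?_⟩
  have hw : comps.findIdx (fun c => PySem.Set.contains c x) < comps.length := hidx ▸ hj
  have := List.findIdx_getElem (p := fun c => PySem.Set.contains c x) (xs := comps) (w := hw)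
  rw [← PySem.Set.contains_iff]
  simp only [hidx] at this
  exact this

lemma pvFindComp_none {comps : List (PySem.Set String)} {x : String}
    (h : pvFindComp comps x = none) : ¬ pvTouched comps x := by
  rw [pvFindComp, List.findIdx?_eq_none_iff] at h
  rintro ⟨c, hc, hx⟩
  have hfalse := h c hc
  have htrue := (PySem.Set.contains_iff c x).mpr hx
  rw [hfalse] at htrue
  exact Bool.false_ne_true htrue

lemma pvSetOfTwo_mem (a b x : String) :
    x ∈ PySem.Set.add (PySem.Set.add PySem.Set.empty a) b ↔ x = a ∨ x = b := by
  rw [PySem.Set.mem_add, PySem.Set.mem_add]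
  simp [PySem.Set.empty]

lemma pvTouched_append (comps : List (PySem.Set String)) (c : PySem.Set String) (x : String) :
    pvTouched (comps ++ [c]) x ↔ pvTouched comps x ∨ x ∈ c := by
  constructor
  · rintro ⟨d, hd, hx⟩
    rcases List.mem_append.mp hd with h | h
    · exact Or.inl ⟨d, h, hx⟩
    · rw [List.mem_singleton] at h
      exact Or.inr (h ▸ hx)
  · rintro (⟨d, hd, hx⟩ | hx)
    · exact ⟨d, List.mem_append_left _ hd, hx⟩
    · exact ⟨c, List.mem_append_right _ (List.mem_singleton.mpr rfl), hx⟩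

lemma pvSet_add_ne_nil (s : PySem.Set String) (x : String) : PySem.Set.add s x ≠ [] := by
  intro h
  have hx : x ∈ PySem.Set.add s x := (PySem.Set.mem_add s x x).mpr (Or.inr rfl)
  rw [h] at hx
  exact List.not_mem_nil hx

-- branch: neither endpoint touched yet — append the new component {a, b}
lemma pvMergeNN {comps : List (PySem.Set String)} {E : List (String × String)} {a b : String}
    (hinv : pvCompsInv comps E) (ha : ¬ pvTouched comps a) (hb : ¬ pvTouched comps b) :
    pvCompsInv (comps ++ [PySem.Set.add (PySem.Set.add PySem.Set.empty a) b]) (E ++ [(a, b)]) := by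
  obtain ⟨h1, h3, hT, h2⟩ := hinv
  set nc := PySem.Set.add (PySem.Set.add PySem.Set.empty a) b with hnc
  have hmemnc : ∀ x, x ∈ nc ↔ x = a ∨ x = b := pvSetOfTwo_mem a b
  have hEa : ¬ ∃ e ∈ E, a = e.1 ∨ a = e.2 := fun h => ha ((hT a).mpr h)
  have hEb : ¬ ∃ e ∈ E, b = e.1 ∨ b = e.2 := fun h => hb ((hT b).mpr h)
  have hTnew : ∀ x, pvTouched (comps ++ [nc]) x ↔ pvTouched comps x ∨ x = a ∨ x = b := by
    intro x; rw [pvTouched_append, hmemnc]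
  refine ⟨?_, ?_, ?_, ?_⟩
  · intro c hc
    rcases List.mem_append.mp hc with h | h
    · exact h1 c h
    · rw [List.mem_singleton] at h
      subst h
      refine ⟨pvSet_add_ne_nil _ _, ?_⟩
      exact PySem.Set.nodup_add _ _ (PySem.Set.nodup_add _ _ List.nodup_nil)
  · intro i j hi hj hij x hxi hxj
    rw [List.length_append, List.length_singleton] at hi hj
    by_cases hic : i < comps.length <;> by_cases hjc : j < comps.length
    · rw [List.getElem_append_left hic] at hxi
      rw [List.getElem_append_left hjc] at hxj
      exact h3 i j hic hjc hij x hxi hxj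
    · have hj' : j = comps.length := by omega
      rw [List.getElem_append_left hic] at hxi
      rw [List.getElem_concat_length hj'] at hxj
      rcases (hmemnc x).mp hxj with rfl | rfl
      · exact ha ⟨comps[i], List.getElem_mem _, hxi⟩
      · exact hb ⟨comps[i], List.getElem_mem _, hxi⟩
    · have hi' : i = comps.length := by omega
      rw [List.getElem_concat_length hi'] at hxi
      rw [List.getElem_append_left hjc] at hxj
      rcases (hmemnc x).mp hxi with rfl | rfl
      · exact ha ⟨comps[j], List.getElem_mem _, hxj⟩
      · exact hb ⟨comps[j], List.getElem_mem _, hxj⟩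
    · omega
  · intro x
    rw [hTnew]
    constructor
    · rintro (h | rfl | rfl)
      · obtain ⟨e, he, hx⟩ := (hT x).mp h
        exact ⟨e, List.mem_append_left _ he, hx⟩
      · exact ⟨(x, b), List.mem_append_right _ (List.mem_singleton.mpr rfl), Or.inl rfl⟩
      · exact ⟨(a, x), List.mem_append_right _ (List.mem_singleton.mpr rfl), Or.inr rfl⟩
    · rintro ⟨e, he, hx⟩
      rcases List.mem_append.mp he with h | h
      · exact Or.inl ((hT x).mpr ⟨e, h, hx⟩)
      · rw [List.mem_singleton] at h
        subst h
        rcases hx with h | h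
        · exact Or.inr (Or.inl h)
        · exact Or.inr (Or.inr h)
  · intro x y
    have hnewconn : pvConn (E ++ [(a, b)]) a b :=
      Relation.EqvGen.rel _ _ (List.mem_append_right _ (List.mem_singleton.mpr rfl))
    constructor
    · rintro ⟨c, hc, hx, hy⟩
      rcases List.mem_append.mp hc with h | h
      · obtain ⟨hconn, htx, hty⟩ := (h2 x y).mp ⟨c, h, hx, hy⟩
        exact ⟨pvConn_mono hconn, (hTnew x).mpr (Or.inl htx), (hTnew y).mpr (Or.inl hty)⟩
      · rw [List.mem_singleton] at h
        subst h
        refine ⟨?_, (hTnew x).mpr ?_, (hTnew y).mpr ?_⟩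
        · rcases (hmemnc x).mp hx with rfl | rfl <;> rcases (hmemnc y).mp hy with rfl | rfl
          · exact pvConn_refl _ _
          · exact hnewconn
          · exact pvConn_symm hnewconn
          · exact pvConn_refl _ _
        · rcases (hmemnc x).mp hx with rfl | rfl
          · exact Or.inr (Or.inl rfl)
          · exact Or.inr (Or.inr rfl)
        · rcases (hmemnc y).mp hy with rfl | rfl
          · exact Or.inr (Or.inl rfl)
          · exact Or.inr (Or.inr rfl)
    · rintro ⟨hconn, htx, hty⟩
      have hxcase := (hTnew x).mp htx
      have hycase := (hTnew y).mp hty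
      by_cases hxo : pvTouched comps x
      · by_cases hyo : pvTouched comps y
        · rcases pvConn_snoc.mp hconn with h | ⟨hc1, hc2⟩ | ⟨hc1, hc2⟩
          · obtain ⟨c, hc, hxc, hyc⟩ := (h2 x y).mpr ⟨h, hxo, hyo⟩
            exact ⟨c, List.mem_append_left _ hc, hxc, hyc⟩
          · exact absurd ((pvConn_of_not_endpoint hEa x).mp hc1 ▸ hxo) ha
          · exact absurd ((pvConn_of_not_endpoint hEb x).mp hc1 ▸ hxo) hb
        · exfalso
          have hyab : y = a ∨ y = b := (hycase.resolve_left hyo).imp id id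
          rcases pvConn_snoc.mp hconn with h | ⟨hc1, hc2⟩ | ⟨hc1, hc2⟩
          · rcases hyab with rfl | rfl
            · exact ha ((pvConn_of_not_endpoint hEa x).mp h ▸ hxo)
            · exact hb ((pvConn_of_not_endpoint hEb x).mp h ▸ hxo)
          · exact ha ((pvConn_of_not_endpoint hEa x).mp hc1 ▸ hxo)
          · exact hb ((pvConn_of_not_endpoint hEb x).mp hc1 ▸ hxo)
      · have hxab : x = a ∨ x = b := (hxcase.resolve_left hxo).imp id id
        by_cases hyo : pvTouched comps y
        · exfalso
          have hconn' := pvConn_symm hconn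
          rcases pvConn_snoc.mp hconn' with h | ⟨hc1, hc2⟩ | ⟨hc1, hc2⟩
          · rcases hxab with rfl | rfl
            · exact ha ((pvConn_of_not_endpoint hEa y).mp h ▸ hyo)
            · exact hb ((pvConn_of_not_endpoint hEb y).mp h ▸ hyo)
          · exact ha ((pvConn_of_not_endpoint hEa y).mp hc1 ▸ hyo)
          · exact hb ((pvConn_of_not_endpoint hEb y).mp hc1 ▸ hyo)
        · have hyab : y = a ∨ y = b := (hycase.resolve_left hyo).imp id id
          exact ⟨nc, List.mem_append_right _ (List.mem_singleton.mpr rfl),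
            (hmemnc x).mpr hxab, (hmemnc y).mpr hyab⟩


lemma pvMem_set {l : List (PySem.Set String)} {j : Nat} (hj : j < l.length)
    (v c : PySem.Set String) :
    c ∈ l.set j v ↔ v = c ∨ ∃ k, ∃ hk : k < l.length, k ≠ j ∧ l[k] = c := by
  rw [List.mem_iff_getElem]
  constructor
  · rintro ⟨k, hk, heq⟩
    rw [List.length_set] at hk
    rw [List.getElem_set] at heq
    by_cases h : j = k
    · rw [if_pos h] at heq; exact Or.inl heq
    · rw [if_neg h] at heq; exact Or.inr ⟨k, hk, Ne.symm h, heq⟩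
  · rintro (h | ⟨k, hk, hkj, heq⟩)
    · exact ⟨j, by rw [List.length_set]; exact hj, by rw [List.getElem_set, if_pos rfl]; exact h⟩
    · exact ⟨k, by rw [List.length_set]; exact hk,
        by rw [List.getElem_set, if_neg (Ne.symm hkj)]; exact heq⟩

lemma pvMergeAN {comps : List (PySem.Set String)} {E : List (String × String)}
    {a b : String} {jb : Nat}
    (hinv : pvCompsInv comps E) (ha : ¬ pvTouched comps a) (hjb : jb < comps.length)
    (hbm : b ∈ comps[jb]) :
    pvCompsInv (comps.set jb (PySem.Set.add comps[jb] a)) (E ++ [(a, b)]) := by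
  obtain ⟨h1, h3, hT, h2⟩ := hinv
  have hEa : ¬ ∃ e ∈ E, a = e.1 ∨ a = e.2 := fun h => ha ((hT a).mpr h)
  have htb : pvTouched comps b := ⟨comps[jb], List.getElem_mem _, hbm⟩
  have hnab : a ≠ b := fun h => ha (h ▸ htb)
  set c' := PySem.Set.add comps[jb] a with hc'
  have hmemc' : ∀ x, x ∈ c' ↔ x ∈ comps[jb] ∨ x = a := fun x => PySem.Set.mem_add _ _ _
  have hc'mem : c' ∈ comps.set jb c' := (pvMem_set hjb c' c').mpr (Or.inl rfl)
  have hTnew : ∀ x, pvTouched (comps.set jb c') x ↔ pvTouched comps x ∨ x = a := by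
    intro x
    constructor
    · rintro ⟨c, hc, hx⟩
      rcases (pvMem_set hjb c' c).mp hc with rfl | ⟨k, hk, hkj, rfl⟩
      · rcases (hmemc' x).mp hx with h | h
        · exact Or.inl ⟨comps[jb], List.getElem_mem _, h⟩
        · exact Or.inr h
      · exact Or.inl ⟨comps[k], List.getElem_mem _, hx⟩
    · rintro (⟨c, hc, hx⟩ | rfl)
      · obtain ⟨k, hk, rfl⟩ := List.mem_iff_getElem.mp hc
        by_cases hkj : k = jb
        · subst hkj
          exact ⟨c', hc'mem, (hmemc' x).mpr (Or.inl hx)⟩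
        · exact ⟨comps[k], (pvMem_set hjb c' _).mpr (Or.inr ⟨k, hk, hkj, rfl⟩), hx⟩
      · exact ⟨c', hc'mem, (hmemc' x).mpr (Or.inr rfl)⟩
  have hnewconn : pvConn (E ++ [(a, b)]) a b :=
    Relation.EqvGen.rel _ _ (List.mem_append_right _ (List.mem_singleton.mpr rfl))
  -- x and b in a common component forces x ∈ comps[jb]
  have hxjb : ∀ x, pvTouched comps x → pvConn E x b → x ∈ comps[jb] := by
    intro x htx hxb
    obtain ⟨c, hc, hxc, hbc⟩ := (h2 x b).mpr ⟨hxb, htx, htb⟩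
    obtain ⟨k, hk, rfl⟩ := List.mem_iff_getElem.mp hc
    by_cases hkj : k = jb
    · subst hkj; exact hxc
    · exact absurd hbm (h3 k jb hk hjb hkj b hbc)
  refine ⟨?_, ?_, ?_, ?_⟩
  · intro c hc
    rcases (pvMem_set hjb c' c).mp hc with rfl | ⟨k, hk, _, rfl⟩
    · exact ⟨pvSet_add_ne_nil _ _, PySem.Set.nodup_add _ _ (h1 _ (List.getElem_mem _)).2⟩
    · exact h1 _ (List.getElem_mem _)
  · intro i j hi hj hij x hxi hxj
    rw [List.length_set] at hi hj
    rw [List.getElem_set] at hxi hxj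
    by_cases hijb : jb = i <;> by_cases hjjb : jb = j
    · omega
    · rw [if_pos hijb] at hxi
      rw [if_neg hjjb] at hxj
      rcases (hmemc' x).mp hxi with h | rfl
      · exact h3 jb j hjb hj (by omega) x (hijb ▸ h) hxj
      · exact ha ⟨comps[j], List.getElem_mem _, hxj⟩
    · rw [if_neg hijb] at hxi
      rw [if_pos hjjb] at hxj
      rcases (hmemc' x).mp hxj with h | rfl
      · exact h3 jb i hjb hi (by omega) x (hjjb ▸ h) hxi
      · exact ha ⟨comps[i], List.getElem_mem _, hxi⟩
    · rw [if_neg hijb] at hxi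
      rw [if_neg hjjb] at hxj
      exact h3 i j hi hj hij x hxi hxj
  · intro x
    rw [hTnew]
    constructor
    · rintro (h | rfl)
      · obtain ⟨e, he, hx⟩ := (hT x).mp h
        exact ⟨e, List.mem_append_left _ he, hx⟩
      · exact ⟨(x, b), List.mem_append_right _ (List.mem_singleton.mpr rfl), Or.inl rfl⟩
    · rintro ⟨e, he, hx⟩
      rcases List.mem_append.mp he with h | h
      · exact Or.inl ((hT x).mpr ⟨e, h, hx⟩)
      · rw [List.mem_singleton] at h
        subst h
        rcases hx with rfl | rfl
        · exact Or.inr rfl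
        · exact Or.inl htb
  · intro x y
    constructor
    · rintro ⟨c, hc, hx, hy⟩
      rcases (pvMem_set hjb c' c).mp hc with rfl | ⟨k, hk, hkj, rfl⟩
      · have hcx : x ∈ comps[jb] ∨ x = a := (hmemc' x).mp hx
        have hcy : y ∈ comps[jb] ∨ y = a := (hmemc' y).mp hy
        refine ⟨?_, (hTnew x).mpr (hcx.imp (fun h => ⟨comps[jb], List.getElem_mem _, h⟩) id),
          (hTnew y).mpr (hcy.imp (fun h => ⟨comps[jb], List.getElem_mem _, h⟩) id)⟩
        rcases hcx with hx' | rfl <;> rcases hcy with hy' | rfl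
        · exact pvConn_mono ((h2 x y).mp ⟨comps[jb], List.getElem_mem _, hx', hy'⟩).1
        · have hxb : pvConn E x b := ((h2 x b).mp ⟨comps[jb], List.getElem_mem _, hx', hbm⟩).1
          exact pvConn_trans (pvConn_mono hxb) (pvConn_symm hnewconn)
        · have hyb : pvConn E y b := ((h2 y b).mp ⟨comps[jb], List.getElem_mem _, hy', hbm⟩).1
          exact pvConn_trans hnewconn (pvConn_symm (pvConn_mono hyb))
        · exact pvConn_refl _ _
      · obtain ⟨hconn, htx, hty⟩ := (h2 x y).mp ⟨comps[k], List.getElem_mem _, hx, hy⟩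
        exact ⟨pvConn_mono hconn, (hTnew x).mpr (Or.inl htx), (hTnew y).mpr (Or.inl hty)⟩
    · rintro ⟨hconn, htx', hty'⟩
      have hxcase := (hTnew x).mp htx'
      have hycase := (hTnew y).mp hty'
      by_cases hxo : pvTouched comps x
      · by_cases hyo : pvTouched comps y
        · rcases pvConn_snoc.mp hconn with h | ⟨hc1, hc2⟩ | ⟨hc1, hc2⟩
          · obtain ⟨c, hc, hxc, hyc⟩ := (h2 x y).mpr ⟨h, hxo, hyo⟩
            obtain ⟨k, hk, rfl⟩ := List.mem_iff_getElem.mp hc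
            by_cases hkj : k = jb
            · subst hkj
              exact ⟨c', hc'mem, (hmemc' x).mpr (Or.inl hxc), (hmemc' y).mpr (Or.inl hyc)⟩
            · exact ⟨comps[k], (pvMem_set hjb c' _).mpr (Or.inr ⟨k, hk, hkj, rfl⟩), hxc, hyc⟩
          · exact absurd ((pvConn_of_not_endpoint hEa x).mp hc1 ▸ hxo) ha
          · exact absurd ((pvConn_of_not_endpoint hEa y).mp (pvConn_symm hc2) ▸ hyo) ha
        · -- y = a
          have hya : y = a := (hycase.resolve_left hyo)
          subst hya
          rcases pvConn_snoc.mp hconn with h | ⟨hc1, hc2⟩ | ⟨hc1, hc2⟩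
          · exact absurd ((pvConn_of_not_endpoint hEa x).mp h ▸ hxo) ha
          · exact absurd ((pvConn_of_not_endpoint hEa b).mp hc2 ▸ htb) ha
          · have hxjb' := hxjb x hxo hc1
            exact ⟨c', hc'mem, (hmemc' x).mpr (Or.inl hxjb'), (hmemc' _).mpr (Or.inr rfl)⟩
      · have hxa : x = a := (hxcase.resolve_left hxo)
        by_cases hyo : pvTouched comps y
        · rcases pvConn_snoc.mp hconn with h | ⟨hc1, hc2⟩ | ⟨hc1, hc2⟩
          · exact absurd ((pvConn_of_not_endpoint hEa y).mp (pvConn_symm (hxa ▸ h)) ▸ hyo) ha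
          · exact ⟨c', hc'mem, (hmemc' x).mpr (Or.inr hxa),
              (hmemc' y).mpr (Or.inl (hxjb y hyo (pvConn_symm hc2)))⟩
          · exact absurd ((pvConn_of_not_endpoint hEa y).mp (pvConn_symm hc2) ▸ hyo) ha
        · have hya : y = a := (hycase.resolve_left hyo)
          exact ⟨c', hc'mem, (hmemc' x).mpr (Or.inr hxa), (hmemc' y).mpr (Or.inr hya)⟩

lemma pvMergeNA {comps : List (PySem.Set String)} {E : List (String × String)}
    {a b : String} {ja : Nat}
    (hinv : pvCompsInv comps E) (hb : ¬ pvTouched comps b) (hja : ja < comps.length)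
    (ham : a ∈ comps[ja]) :
    pvCompsInv (comps.set ja (PySem.Set.add comps[ja] b)) (E ++ [(a, b)]) := by
  obtain ⟨h1, h3, hT, h2⟩ := hinv
  have hEb : ¬ ∃ e ∈ E, b = e.1 ∨ b = e.2 := fun h => hb ((hT b).mpr h)
  have hta : pvTouched comps a := ⟨comps[ja], List.getElem_mem _, ham⟩
  set c' := PySem.Set.add comps[ja] b with hc'
  have hmemc' : ∀ x, x ∈ c' ↔ x ∈ comps[ja] ∨ x = b := fun x => PySem.Set.mem_add _ _ _
  have hc'mem : c' ∈ comps.set ja c' := (pvMem_set hja c' c').mpr (Or.inl rfl)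
  have hTnew : ∀ x, pvTouched (comps.set ja c') x ↔ pvTouched comps x ∨ x = b := by
    intro x
    constructor
    · rintro ⟨c, hc, hx⟩
      rcases (pvMem_set hja c' c).mp hc with rfl | ⟨k, hk, hkj, rfl⟩
      · rcases (hmemc' x).mp hx with h | h
        · exact Or.inl ⟨comps[ja], List.getElem_mem _, h⟩
        · exact Or.inr h
      · exact Or.inl ⟨comps[k], List.getElem_mem _, hx⟩
    · rintro (⟨c, hc, hx⟩ | rfl)
      · obtain ⟨k, hk, rfl⟩ := List.mem_iff_getElem.mp hc
        by_cases hkj : k = ja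
        · subst hkj
          exact ⟨c', hc'mem, (hmemc' x).mpr (Or.inl hx)⟩
        · exact ⟨comps[k], (pvMem_set hja c' _).mpr (Or.inr ⟨k, hk, hkj, rfl⟩), hx⟩
      · exact ⟨c', hc'mem, (hmemc' x).mpr (Or.inr rfl)⟩
  have hnewconn : pvConn (E ++ [(a, b)]) a b :=
    Relation.EqvGen.rel _ _ (List.mem_append_right _ (List.mem_singleton.mpr rfl))
  have hxja : ∀ x, pvTouched comps x → pvConn E x a → x ∈ comps[ja] := by
    intro x htx hxa
    obtain ⟨c, hc, hxc, hac⟩ := (h2 x a).mpr ⟨hxa, htx, hta⟩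
    obtain ⟨k, hk, rfl⟩ := List.mem_iff_getElem.mp hc
    by_cases hkj : k = ja
    · subst hkj; exact hxc
    · exact absurd ham (h3 k ja hk hja hkj a hac)
  refine ⟨?_, ?_, ?_, ?_⟩
  · intro c hc
    rcases (pvMem_set hja c' c).mp hc with rfl | ⟨k, hk, _, rfl⟩
    · exact ⟨pvSet_add_ne_nil _ _, PySem.Set.nodup_add _ _ (h1 _ (List.getElem_mem _)).2⟩
    · exact h1 _ (List.getElem_mem _)
  · intro i j hi hj hij x hxi hxj
    rw [List.length_set] at hi hj
    rw [List.getElem_set] at hxi hxj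
    by_cases hija : ja = i <;> by_cases hjja : ja = j
    · omega
    · rw [if_pos hija] at hxi
      rw [if_neg hjja] at hxj
      rcases (hmemc' x).mp hxi with h | rfl
      · exact h3 ja j hja hj (by omega) x (hija ▸ h) hxj
      · exact hb ⟨comps[j], List.getElem_mem _, hxj⟩
    · rw [if_neg hija] at hxi
      rw [if_pos hjja] at hxj
      rcases (hmemc' x).mp hxj with h | rfl
      · exact h3 ja i hja hi (by omega) x (hjja ▸ h) hxi
      · exact hb ⟨comps[i], List.getElem_mem _, hxi⟩
    · rw [if_neg hija] at hxi
      rw [if_neg hjja] at hxj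
      exact h3 i j hi hj hij x hxi hxj
  · intro x
    rw [hTnew]
    constructor
    · rintro (h | rfl)
      · obtain ⟨e, he, hx⟩ := (hT x).mp h
        exact ⟨e, List.mem_append_left _ he, hx⟩
      · exact ⟨(a, x), List.mem_append_right _ (List.mem_singleton.mpr rfl), Or.inr rfl⟩
    · rintro ⟨e, he, hx⟩
      rcases List.mem_append.mp he with h | h
      · exact Or.inl ((hT x).mpr ⟨e, h, hx⟩)
      · rw [List.mem_singleton] at h
        subst h
        rcases hx with rfl | rfl
        · exact Or.inl hta
        · exact Or.inr rfl
  · intro x y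
    constructor
    · rintro ⟨c, hc, hx, hy⟩
      rcases (pvMem_set hja c' c).mp hc with rfl | ⟨k, hk, hkj, rfl⟩
      · have hcx : x ∈ comps[ja] ∨ x = b := (hmemc' x).mp hx
        have hcy : y ∈ comps[ja] ∨ y = b := (hmemc' y).mp hy
        refine ⟨?_, (hTnew x).mpr (hcx.imp (fun h => ⟨comps[ja], List.getElem_mem _, h⟩) id),
          (hTnew y).mpr (hcy.imp (fun h => ⟨comps[ja], List.getElem_mem _, h⟩) id)⟩
        rcases hcx with hx' | rfl <;> rcases hcy with hy' | rfl
        · exact pvConn_mono ((h2 x y).mp ⟨comps[ja], List.getElem_mem _, hx', hy'⟩).1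
        · have hxa : pvConn E x a := ((h2 x a).mp ⟨comps[ja], List.getElem_mem _, hx', ham⟩).1
          exact pvConn_trans (pvConn_mono hxa) hnewconn
        · have hya : pvConn E y a := ((h2 y a).mp ⟨comps[ja], List.getElem_mem _, hy', ham⟩).1
          exact pvConn_trans (pvConn_symm hnewconn) (pvConn_symm (pvConn_mono hya))
        · exact pvConn_refl _ _
      · obtain ⟨hconn, htx, hty⟩ := (h2 x y).mp ⟨comps[k], List.getElem_mem _, hx, hy⟩
        exact ⟨pvConn_mono hconn, (hTnew x).mpr (Or.inl htx), (hTnew y).mpr (Or.inl hty)⟩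
    · rintro ⟨hconn, htx', hty'⟩
      have hxcase := (hTnew x).mp htx'
      have hycase := (hTnew y).mp hty'
      by_cases hxo : pvTouched comps x
      · by_cases hyo : pvTouched comps y
        · rcases pvConn_snoc.mp hconn with h | ⟨hc1, hc2⟩ | ⟨hc1, hc2⟩
          · obtain ⟨c, hc, hxc, hyc⟩ := (h2 x y).mpr ⟨h, hxo, hyo⟩
            obtain ⟨k, hk, rfl⟩ := List.mem_iff_getElem.mp hc
            by_cases hkj : k = ja
            · subst hkj
              exact ⟨c', hc'mem, (hmemc' x).mpr (Or.inl hxc), (hmemc' y).mpr (Or.inl hyc)⟩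
            · exact ⟨comps[k], (pvMem_set hja c' _).mpr (Or.inr ⟨k, hk, hkj, rfl⟩), hxc, hyc⟩
          · exact absurd ((pvConn_of_not_endpoint hEb y).mp (pvConn_symm hc2) ▸ hyo) hb
          · exact absurd ((pvConn_of_not_endpoint hEb x).mp hc1 ▸ hxo) hb
        · have hyb : y = b := hycase.resolve_left hyo
          rcases pvConn_snoc.mp hconn with h | ⟨hc1, hc2⟩ | ⟨hc1, hc2⟩
          · exact absurd ((pvConn_of_not_endpoint hEb x).mp (hyb ▸ h) ▸ hxo) hb
          · exact ⟨c', hc'mem, (hmemc' x).mpr (Or.inl (hxja x hxo hc1)),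
              (hmemc' y).mpr (Or.inr hyb)⟩
          · exact absurd ((pvConn_of_not_endpoint hEb x).mp hc1 ▸ hxo) hb
      · have hxb : x = b := hxcase.resolve_left hxo
        by_cases hyo : pvTouched comps y
        · rcases pvConn_snoc.mp hconn with h | ⟨hc1, hc2⟩ | ⟨hc1, hc2⟩
          · exact absurd ((pvConn_of_not_endpoint hEb y).mp (pvConn_symm (hxb ▸ h)) ▸ hyo) hb
          · exact absurd ((pvConn_of_not_endpoint hEb a).mp (pvConn_symm (hxb ▸ hc1)) ▸ hta) hb
          · exact ⟨c', hc'mem, (hmemc' x).mpr (Or.inr hxb),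
              (hmemc' y).mpr (Or.inl (hxja y hyo (pvConn_symm hc2)))⟩
        · have hyb : y = b := hycase.resolve_left hyo
          exact ⟨c', hc'mem, (hmemc' x).mpr (Or.inr hxb), (hmemc' y).mpr (Or.inr hyb)⟩

lemma pvMergeEQ {comps : List (PySem.Set String)} {E : List (String × String)}
    {a b : String} {ja : Nat}
    (hinv : pvCompsInv comps E) (hja : ja < comps.length)
    (ham : a ∈ comps[ja]) (hbm : b ∈ comps[ja]) :
    pvCompsInv comps (E ++ [(a, b)]) := by
  obtain ⟨h1, h3, hT, h2⟩ := hinv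
  have hconnab : pvConn E a b := ((h2 a b).mp ⟨comps[ja], List.getElem_mem _, ham, hbm⟩).1
  have hta : pvTouched comps a := ⟨comps[ja], List.getElem_mem _, ham⟩
  have htb : pvTouched comps b := ⟨comps[ja], List.getElem_mem _, hbm⟩
  refine ⟨h1, h3, ?_, ?_⟩
  · intro x
    rw [hT x]
    constructor
    · rintro ⟨e, he, hx⟩; exact ⟨e, List.mem_append_left _ he, hx⟩
    · rintro ⟨e, he, hx⟩
      rcases List.mem_append.mp he with h | h
      · exact ⟨e, h, hx⟩
      · rw [List.mem_singleton] at h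
        subst h
        rcases hx with rfl | rfl
        · exact (hT _).mp hta
        · exact (hT _).mp htb
  · intro x y
    rw [h2 x y, pvConn_snoc_self hconnab]

lemma pvNE_len (comps : List (PySem.Set String)) (ja jb : Nat) (u : PySem.Set String)
    (hjb : jb < comps.length) :
    ((comps.set ja u).eraseIdx jb).length = comps.length - 1 := by
  rw [List.length_eraseIdx, List.length_set, if_pos hjb]

lemma pvNE_getElem (comps : List (PySem.Set String)) (ja jb : Nat) (u : PySem.Set String)
    (hja : ja < comps.length) (hjb : jb < comps.length)
    (k : Nat) (hk : k < comps.length - 1) :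
    ((comps.set ja u).eraseIdx jb)[k]'(by rw [pvNE_len comps ja jb u hjb]; exact hk) =
      if ja = (if k < jb then k else k + 1) then u
      else comps[if k < jb then k else k + 1]'(by split <;> omega) := by
  rw [List.getElem_eraseIdx]
  by_cases hkj : k < jb
  · rw [dif_pos hkj, List.getElem_set]
    simp only [if_pos hkj]
  · rw [dif_neg hkj, List.getElem_set]
    simp only [if_neg hkj]

lemma pvNE_mem (comps : List (PySem.Set String)) (ja jb : Nat) (u : PySem.Set String)
    (hja : ja < comps.length) (hjb : jb < comps.length) (hne : ja ≠ jb)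
    (c : PySem.Set String) :
    c ∈ (comps.set ja u).eraseIdx jb ↔
      c = u ∨ ∃ m, ∃ hm : m < comps.length, m ≠ ja ∧ m ≠ jb ∧ comps[m] = c := by
  constructor
  · intro hc
    obtain ⟨k, hk, heq⟩ := List.mem_iff_getElem.mp hc
    rw [pvNE_len comps ja jb u hjb] at hk
    rw [pvNE_getElem comps ja jb u hja hjb k hk] at heq
    by_cases h : ja = (if k < jb then k else k + 1)
    · rw [if_pos h] at heq; exact Or.inl heq.symm
    · rw [if_neg h] at heq
      exact Or.inr ⟨if k < jb then k else k + 1, by split <;> omega, Ne.symm h,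
        by split <;> omega, heq⟩
  · intro hc
    rw [List.mem_iff_getElem]
    rcases hc with rfl | ⟨m, hm, hmja, hmjb, rfl⟩
    · have hk : (if ja < jb then ja else ja - 1) < comps.length - 1 := by split <;> omega
      refine ⟨if ja < jb then ja else ja - 1, by rw [pvNE_len comps ja jb c hjb]; exact hk, ?_⟩
      rw [pvNE_getElem comps ja jb c hja hjb _ hk]
      rw [if_pos (by split <;> (try split) <;> omega)]
    · have hk : (if m < jb then m else m - 1) < comps.length - 1 := by split <;> omega
      refine ⟨if m < jb then m else m - 1, by rw [pvNE_len comps ja jb u hjb]; exact hk, ?_⟩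
      rw [pvNE_getElem comps ja jb u hja hjb _ hk]
      have hidx : (if (if m < jb then m else m - 1) < jb then (if m < jb then m else m - 1)
          else (if m < jb then m else m - 1) + 1) = m := by
        split <;> (try split) <;> omega
      rw [if_neg (by rw [hidx]; exact Ne.symm hmja)]
      simp only [hidx]

lemma pvMergeNE {comps : List (PySem.Set String)} {E : List (String × String)}
    {a b : String} {ja jb : Nat}
    (hinv : pvCompsInv comps E) (hja : ja < comps.length) (hjb : jb < comps.length)
    (hne : ja ≠ jb) (ham : a ∈ comps[ja]) (hbm : b ∈ comps[jb]) :
    pvCompsInv ((comps.set ja (PySem.Set.union comps[ja] comps[jb])).eraseIdx jb)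
      (E ++ [(a, b)]) := by
  obtain ⟨h1, h3, hT, h2⟩ := hinv
  set u := PySem.Set.union comps[ja] comps[jb] with hu
  have hmemu : ∀ x, x ∈ u ↔ x ∈ comps[ja] ∨ x ∈ comps[jb] := fun x => PySem.Set.mem_union _ _ _
  have humem : u ∈ (comps.set ja u).eraseIdx jb :=
    (pvNE_mem comps ja jb u hja hjb hne u).mpr (Or.inl rfl)
  have hta : pvTouched comps a := ⟨_, List.getElem_mem _, ham⟩
  have htb : pvTouched comps b := ⟨_, List.getElem_mem _, hbm⟩
  have hnewconn : pvConn (E ++ [(a, b)]) a b :=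
    Relation.EqvGen.rel _ _ (List.mem_append_right _ (List.mem_singleton.mpr rfl))
  have hTnew : ∀ x, pvTouched ((comps.set ja u).eraseIdx jb) x ↔ pvTouched comps x := by
    intro x
    constructor
    · rintro ⟨c, hc, hx⟩
      rcases (pvNE_mem comps ja jb u hja hjb hne c).mp hc with rfl | ⟨m, hm, _, _, rfl⟩
      · rcases (hmemu x).mp hx with h | h
        · exact ⟨_, List.getElem_mem _, h⟩
        · exact ⟨_, List.getElem_mem _, h⟩
      · exact ⟨_, List.getElem_mem _, hx⟩
    · rintro ⟨c, hc, hx⟩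
      obtain ⟨k, hk, rfl⟩ := List.mem_iff_getElem.mp hc
      by_cases hkja : k = ja
      · subst hkja; exact ⟨u, humem, (hmemu x).mpr (Or.inl hx)⟩
      · by_cases hkjb : k = jb
        · subst hkjb; exact ⟨u, humem, (hmemu x).mpr (Or.inr hx)⟩
        · exact ⟨comps[k],
            (pvNE_mem comps ja jb u hja hjb hne _).mpr (Or.inr ⟨k, hk, hkja, hkjb, rfl⟩), hx⟩
  have hxja : ∀ x, pvTouched comps x → pvConn E x a → x ∈ comps[ja] := by
    intro x htx hxa
    obtain ⟨c, hc, hxc, hac⟩ := (h2 x a).mpr ⟨hxa, htx, hta⟩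
    obtain ⟨k, hk, rfl⟩ := List.mem_iff_getElem.mp hc
    by_cases hkj : k = ja
    · subst hkj; exact hxc
    · exact absurd ham (h3 k ja hk hja hkj a hac)
  have hxjb : ∀ x, pvTouched comps x → pvConn E x b → x ∈ comps[jb] := by
    intro x htx hxb
    obtain ⟨c, hc, hxc, hbc⟩ := (h2 x b).mpr ⟨hxb, htx, htb⟩
    obtain ⟨k, hk, rfl⟩ := List.mem_iff_getElem.mp hc
    by_cases hkj : k = jb
    · subst hkj; exact hxc
    · exact absurd hbm (h3 k jb hk hjb hkj b hbc)
  refine ⟨?_, ?_, ?_, ?_⟩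
  · intro c hc
    rcases (pvNE_mem comps ja jb u hja hjb hne c).mp hc with rfl | ⟨m, hm, _, _, rfl⟩
    · exact ⟨List.ne_nil_of_mem ((hmemu a).mpr (Or.inl ham)),
        PySem.Set.nodup_union _ _ (h1 _ (List.getElem_mem _)).2⟩
    · exact h1 _ (List.getElem_mem _)
  · intro i j hi hj hij x hxi hxj
    rw [pvNE_len comps ja jb u hjb] at hi hj
    rw [pvNE_getElem comps ja jb u hja hjb i hi] at hxi
    rw [pvNE_getElem comps ja jb u hja hjb j hj] at hxj
    set mi := if i < jb then i else i + 1 with hmi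
    set mj := if j < jb then j else j + 1 with hmj
    have hmine : mi ≠ mj := by rw [hmi, hmj]; split <;> split <;> omega
    have hmijb : mi ≠ jb := by rw [hmi]; split <;> omega
    have hmjjb : mj ≠ jb := by rw [hmj]; split <;> omega
    have hmilt : mi < comps.length := by rw [hmi]; split <;> omega
    have hmjlt : mj < comps.length := by rw [hmj]; split <;> omega
    by_cases hia : ja = mi <;> by_cases hja2 : ja = mj
    · omega
    · rw [if_pos hia] at hxi
      rw [if_neg hja2] at hxj
      rcases (hmemu x).mp hxi with h | h
      · exact h3 ja mj hja hmjlt (by omega) x h hxj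
      · exact h3 jb mj hjb hmjlt (by omega) x h hxj
    · rw [if_neg hia] at hxi
      rw [if_pos hja2] at hxj
      rcases (hmemu x).mp hxj with h | h
      · exact absurd hxi (h3 ja mi hja hmilt (by omega) x h)
      · exact absurd hxi (h3 jb mi hjb hmilt (by omega) x h)
    · rw [if_neg hia] at hxi
      rw [if_neg hja2] at hxj
      exact h3 mi mj hmilt hmjlt hmine x hxi hxj
  · intro x
    rw [hTnew x, hT x]
    constructor
    · rintro ⟨e, he, hx⟩; exact ⟨e, List.mem_append_left _ he, hx⟩
    · rintro ⟨e, he, hx⟩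
      rcases List.mem_append.mp he with h | h
      · exact ⟨e, h, hx⟩
      · rw [List.mem_singleton] at h
        subst h
        rcases hx with rfl | rfl
        · exact (hT _).mp hta
        · exact (hT _).mp htb
  · intro x y
    constructor
    · rintro ⟨c, hc, hx, hy⟩
      rcases (pvNE_mem comps ja jb u hja hjb hne c).mp hc with rfl | ⟨m, hm, _, _, rfl⟩
      · have htx : pvTouched comps x := (hTnew x).mp ⟨u, humem, hx⟩
        have hty : pvTouched comps y := (hTnew y).mp ⟨u, humem, hy⟩
        refine ⟨?_, (hTnew x).mpr htx, (hTnew y).mpr hty⟩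
        have hca : ∀ z, z ∈ comps[ja] → pvConn (E ++ [(a, b)]) z a := fun z hz =>
          pvConn_mono ((h2 z a).mp ⟨_, List.getElem_mem _, hz, ham⟩).1
        have hcb : ∀ z, z ∈ comps[jb] → pvConn (E ++ [(a, b)]) z b := fun z hz =>
          pvConn_mono ((h2 z b).mp ⟨_, List.getElem_mem _, hz, hbm⟩).1
        rcases (hmemu x).mp hx with h | h <;> rcases (hmemu y).mp hy with h' | h'
        · exact pvConn_trans (hca x h) (pvConn_symm (hca y h'))
        · exact pvConn_trans (pvConn_trans (hca x h) hnewconn) (pvConn_symm (hcb y h'))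
        · exact pvConn_trans (pvConn_trans (hcb x h) (pvConn_symm hnewconn))
            (pvConn_symm (hca y h'))
        · exact pvConn_trans (hcb x h) (pvConn_symm (hcb y h'))
      · obtain ⟨hconn, htx, hty⟩ := (h2 x y).mp ⟨comps[m], List.getElem_mem _, hx, hy⟩
        exact ⟨pvConn_mono hconn, (hTnew x).mpr htx, (hTnew y).mpr hty⟩
    · rintro ⟨hconn, htx', hty'⟩
      have htx := (hTnew x).mp htx'
      have hty := (hTnew y).mp hty'
      rcases pvConn_snoc.mp hconn with h | ⟨hc1, hc2⟩ | ⟨hc1, hc2⟩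
      · obtain ⟨c, hc, hxc, hyc⟩ := (h2 x y).mpr ⟨h, htx, hty⟩
        obtain ⟨k, hk, rfl⟩ := List.mem_iff_getElem.mp hc
        by_cases hkja : k = ja
        · subst hkja
          exact ⟨u, humem, (hmemu x).mpr (Or.inl hxc), (hmemu y).mpr (Or.inl hyc)⟩
        · by_cases hkjb : k = jb
          · subst hkjb
            exact ⟨u, humem, (hmemu x).mpr (Or.inr hxc), (hmemu y).mpr (Or.inr hyc)⟩
          · exact ⟨comps[k],
              (pvNE_mem comps ja jb u hja hjb hne _).mpr (Or.inr ⟨k, hk, hkja, hkjb, rfl⟩),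
              hxc, hyc⟩
      · exact ⟨u, humem, (hmemu x).mpr (Or.inl (hxja x htx hc1)),
          (hmemu y).mpr (Or.inr (hxjb y hty (pvConn_symm hc2)))⟩
      · exact ⟨u, humem, (hmemu x).mpr (Or.inr (hxjb x htx hc1)),
          (hmemu y).mpr (Or.inl (hxja y hty (pvConn_symm hc2)))⟩

lemma pvMergeStep_inv {comps : List (PySem.Set String)} {E : List (String × String)}
    (p : List (String × String)) (hinv : pvCompsInv comps E) :
    pvCompsInv (pvMergeStep comps p) (E ++ [(pvKeyA p, pvKeyB p)]) := by
  rw [pvMergeStep]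
  cases hfa : pvFindComp comps (pvKeyA p) with
  | none =>
    cases hfb : pvFindComp comps (pvKeyB p) with
    | none => exact pvMergeNN hinv (pvFindComp_none hfa) (pvFindComp_none hfb)
    | some jb =>
      obtain ⟨hjb, hbm⟩ := pvFindComp_some hfb
      show pvCompsInv
        (comps.set jb (PySem.Set.add (comps.getD jb PySem.Set.empty) (pvKeyA p))) _
      rw [List.getD_eq_getElem _ _ hjb]
      exact pvMergeAN hinv (pvFindComp_none hfa) hjb hbm
  | some ja =>
    obtain ⟨hja, ham⟩ := pvFindComp_some hfa
    cases hfb : pvFindComp comps (pvKeyB p) with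
    | none =>
      show pvCompsInv
        (comps.set ja (PySem.Set.add (comps.getD ja PySem.Set.empty) (pvKeyB p))) _
      rw [List.getD_eq_getElem _ _ hja]
      exact pvMergeNA hinv (pvFindComp_none hfb) hja ham
    | some jb =>
      obtain ⟨hjb, hbm⟩ := pvFindComp_some hfb
      show pvCompsInv
        (if ja ≠ jb then
          (comps.set ja (PySem.Set.union (comps.getD ja PySem.Set.empty)
            (comps.getD jb PySem.Set.empty))).eraseIdx jb
        else comps) _
      by_cases heq : ja = jb
      · rw [if_neg (by simp [heq])]
        subst heq
        exact pvMergeEQ hinv hja ham hbm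
      · rw [if_pos heq, List.getD_eq_getElem _ _ hja, List.getD_eq_getElem _ _ hjb]
        exact pvMergeNE hinv hja hjb heq ham hbm

lemma pvFoldB (pairs : List (List (String × String))) :
    pvCompsInv (pairs.foldl pvMergeStep []) (pvEdges pairs) := by
  induction pairs using List.reverseRecOn with
  | nil =>
    simp only [List.foldl_nil]
    refine ⟨fun c hc => absurd hc List.not_mem_nil,
      fun i j hi _ _ _ _ => by simp at hi, ?_, ?_⟩
    · intro x
      constructor
      · rintro ⟨c, hc, _⟩; exact absurd hc List.not_mem_nil
      · rintro ⟨e, he, _⟩; exact absurd he List.not_mem_nil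
    · intro x y
      constructor
      · rintro ⟨c, hc, _⟩; exact absurd hc List.not_mem_nil
      · rintro ⟨_, ⟨c, hc, _⟩, _⟩; exact absurd hc List.not_mem_nil
  | append_singleton pairs p ih =>
    rw [List.foldl_append, List.foldl_cons, List.foldl_nil]
    have hE : pvEdges (pairs ++ [p]) = pvEdges pairs ++ [(pvKeyA p, pvKeyB p)] := by
      simp [pvEdges]
    rw [hE]
    exact pvMergeStep_inv p ih

-- ---------- emission: both programs produce the canonical cluster list ----------

noncomputable def pvPfin (pairs : List (List (String × String))) : PySem.Dict String String :=
  pairs.foldl (fun P p => pvUnion P (pvKeyA p) (pvKeyB p)) (PySem.Dict.mk [])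

noncomputable def pvCanon (R : String → String) (N : List String) : List (List String) :=
  (PySem.Set.ofList (N.map R)).map
    (fun r => PySem.List.sorted
      (PySem.Set.update PySem.Set.empty (N.filter (fun n => R n == r))) (fun x => x) false)

lemma pvSet_add_of_not_mem {s : PySem.Set String} {x : String} (h : x ∉ s) :
    s.add x = s ++ [x] := by
  unfold PySem.Set.add
  rw [if_neg (by rw [PySem.Set.contains_iff]; exact h)]

lemma pvSet_update_prefix (l : List String) :
    ∀ s : PySem.Set String, ∃ t, PySem.Set.update s l = s ++ t := by
  induction l with
  | nil => intro s; exact ⟨[], by simp [PySem.Set.update]⟩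
  | cons x l ih =>
    intro s
    have hstep : PySem.Set.update s (x :: l) = PySem.Set.update (s.add x) l := rfl
    by_cases h : x ∈ s
    · obtain ⟨t, ht⟩ := ih (s.add x)
      exact ⟨t, by rw [hstep, ht, PySem.Set.add_of_mem h]⟩
    · obtain ⟨t, ht⟩ := ih (s.add x)
      exact ⟨[x] ++ t, by rw [hstep, ht, pvSet_add_of_not_mem h, List.append_assoc]⟩

-- A's output equals the canonical list
lemma pvAeq (pairs : List (List (String × String))) :
    cluster_duplicates_py pairs = pvCanon (pvRoot (pvPfin pairs)) (pvAllNames pairs) := by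
  obtain ⟨hG, hnd, _⟩ := pvFoldA pairs
  show ((pvAllNames pairs).foldl _ (pvPfin pairs, PySem.Dict.mk [])).2.values.map _ = _
  rw [pvClusterFold (pvAllNames pairs) (pvPfin pairs) (PySem.Dict.mk []) hG hnd]
  set R := pvRoot (pvPfin pairs) with hR
  set N := pvAllNames pairs with hN
  have hkeys0 : (PySem.Dict.mk ([] : List (String × PySem.Set String))).keys = [] := by
    simp [PySem.Dict.keys]
  have hkeys : (N.foldl (fun C n =>
      C.insert (R n) (PySem.Set.add (C.getD (R n) PySem.Set.empty) n))
      (PySem.Dict.mk [])).keys = PySem.Set.update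
        (PySem.Dict.mk ([] : List (String × PySem.Set String))).keys (N.map R) :=
    PySem.Dict.keys_foldl_insert_key N R _ _
  have hknd : (N.foldl (fun C n =>
      C.insert (R n) (PySem.Set.add (C.getD (R n) PySem.Set.empty) n))
      (PySem.Dict.mk [])).keys.Nodup :=
    PySem.Dict.nodup_keys_foldl_insert_key N R _ _ (by rw [hkeys0]; exact List.nodup_nil)
  rw [PySem.Dict.values_eq_map_keys _ hknd PySem.Set.empty, hkeys, hkeys0, List.map_map]
  have hupd : PySem.Set.update ([] : PySem.Set String) (N.map R) =
      PySem.Set.ofList (N.map R) := rfl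
  rw [hupd, pvCanon]
  apply List.map_congr_left
  intro r _
  simp only [Function.comp]
  rw [pvEmitA_getD R N (PySem.Dict.mk []) r, pvDict_getD_empty]

-- B's emission loop produces the canonical list
lemma pvEmitB (comps : List (PySem.Set String)) (R : String → String) (N : List String)
    (hclassify : ∀ n, n ∈ N →
      ∃ c₀, comps.find? (fun c => PySem.Set.contains c n) = some c₀ ∧
        (∀ y, y ∈ c₀ ↔ y ∈ N ∧ R y = R n) ∧ c₀.Nodup) :
    ∀ (ns : List String) (S V : PySem.Set String) (O : List (List String)),
    (∀ n ∈ ns, n ∈ N) →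
    (∀ y, y ∈ V ↔ y ∈ N ∧ R y ∈ S) →
    (ns.foldl (fun st name =>
        if PySem.Set.contains st.1 name then st
        else
          match comps.find? (fun c => PySem.Set.contains c name) with
          | some c => (PySem.Set.union st.1 c,
              st.2 ++ [PySem.List.sorted c (fun x => x) false])
          | none => st) (V, O)).2
    = O ++ ((PySem.Set.update S (ns.map R)).drop S.length).map
        (fun r => PySem.List.sorted
          (PySem.Set.update PySem.Set.empty (N.filter (fun n => R n == r)))
          (fun x => x) false) := by
  intro ns
  induction ns with
  | nil =>
    intro S V O _ _
    show O = O ++ ((PySem.Set.update S []).drop S.length).map _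
    have hu : PySem.Set.update S [] = S := rfl
    rw [hu, List.drop_length, List.map_nil, List.append_nil]
  | cons n ns ih =>
    intro S V O hns hV
    have hn : n ∈ N := hns n List.mem_cons_self
    have hstep : PySem.Set.update S ((n :: ns).map R) =
        PySem.Set.update (S.add (R n)) (ns.map R) := rfl
    by_cases hv : n ∈ V
    · have hRn : R n ∈ S := ((hV n).mp hv).2
      have hcont : PySem.Set.contains V n = true := (PySem.Set.contains_iff V n).mpr hv
      simp only [List.foldl_cons, hcont, if_pos]
      rw [ih S V O (fun m hm => hns m (List.mem_cons_of_mem n hm)) hV, hstep,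
        PySem.Set.add_of_mem hRn]
    · have hRn : R n ∉ S := fun h => hv ((hV n).mpr ⟨hn, h⟩)
      have hcont : PySem.Set.contains V n = false := by
        rw [← Bool.not_eq_true, PySem.Set.contains_iff]; exact hv
      obtain ⟨c₀, hfind, hmemc₀, hnd₀⟩ := hclassify n hn
      simp only [List.foldl_cons, hcont, Bool.false_eq_true, if_false, hfind]
      have hsort : PySem.List.sorted c₀ (fun x => x) false =
          PySem.List.sorted
            (PySem.Set.update PySem.Set.empty (N.filter (fun m => R m == R n)))
            (fun x => x) false := by
        apply PySem.List.sorted_eq_sorted_of_perm _ _ _ (fun _ _ h => h)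
        apply List.perm_of_nodup_nodup_toFinset_eq hnd₀
        · exact PySem.Set.nodup_ofList _
        · apply Finset.ext
          intro y
          rw [List.mem_toFinset, List.mem_toFinset, hmemc₀ y]
          show _ ↔ y ∈ PySem.Set.ofList (N.filter (fun m => R m == R n))
          rw [PySem.Set.mem_ofList, List.mem_filter, beq_iff_eq]
      have hV' : ∀ y, y ∈ PySem.Set.union V c₀ ↔ y ∈ N ∧ R y ∈ S.add (R n) := by
        intro y
        rw [PySem.Set.mem_union, hV y, hmemc₀ y, PySem.Set.mem_add]
        constructor
        · rintro (⟨h1, h2⟩ | ⟨h1, h2⟩)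
          · exact ⟨h1, Or.inl h2⟩
          · exact ⟨h1, Or.inr h2⟩
        · rintro ⟨h1, h2 | h2⟩
          · exact Or.inl ⟨h1, h2⟩
          · exact Or.inr ⟨h1, h2⟩
      rw [ih (S.add (R n)) (PySem.Set.union V c₀)
        (O ++ [PySem.List.sorted c₀ (fun x => x) false])
        (fun m hm => hns m (List.mem_cons_of_mem n hm)) hV', hstep, hsort,
        pvSet_add_of_not_mem hRn]
      obtain ⟨t, ht⟩ := pvSet_update_prefix (ns.map R) (S ++ [R n])
      rw [ht]
      have h1 : ((S ++ [R n]) ++ t).drop (S ++ [R n]).length = t := List.drop_left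
      have h2 : ((S ++ [R n]) ++ t).drop S.length = R n :: t := by
        rw [List.append_assoc, List.drop_left]
        rfl
      rw [h1, h2]
      rw [List.append_assoc]
      rfl

lemma pvBeq (pairs : List (List (String × String))) :
    cluster_duplicates_py_alt pairs = pvCanon (pvRoot (pvPfin pairs)) (pvAllNames pairs) := by
  obtain ⟨hG, hnd, hRI⟩ := pvFoldA pairs
  obtain ⟨h1, h3, hT, h2⟩ := pvFoldB pairs
  set R := pvRoot (pvPfin pairs) with hR
  set N := pvAllNames pairs with hN
  set comps := pairs.foldl pvMergeStep [] with hcomps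
  have hNT : ∀ x, x ∈ N ↔ pvTouched comps x := by
    intro x
    rw [hN, pvAllNames_mem]
    exact (hT x).symm
  have hRIx : ∀ x y, R x = R y ↔ pvConn (pvEdges pairs) x y := hRI
  have hclassify : ∀ n, n ∈ N →
      ∃ c₀, comps.find? (fun c => PySem.Set.contains c n) = some c₀ ∧
        (∀ y, y ∈ c₀ ↔ y ∈ N ∧ R y = R n) ∧ c₀.Nodup := by
    intro n hn
    obtain ⟨c, hc, hnc⟩ := (hNT n).mp hn
    have hsome : (comps.find? (fun c => PySem.Set.contains c n)).isSome :=
      List.find?_isSome.mpr ⟨c, hc, (PySem.Set.contains_iff c n).mpr hnc⟩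
    obtain ⟨c₀, hfind⟩ := Option.isSome_iff_exists.mp hsome
    have hc₀ : c₀ ∈ comps := List.mem_of_find?_eq_some hfind
    have hnc₀ : n ∈ c₀ := (PySem.Set.contains_iff c₀ n).mp
      (List.find?_some (p := fun c => PySem.Set.contains c n) hfind)
    refine ⟨c₀, hfind, ?_, (h1 c₀ hc₀).2⟩
    intro y
    constructor
    · intro hy
      obtain ⟨hconn, _, hty⟩ := (h2 n y).mp ⟨c₀, hc₀, hnc₀, hy⟩
      exact ⟨(hNT y).mpr hty, ((hRIx n y).mpr hconn).symm⟩
    · rintro ⟨hyN, hRy⟩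
      have hconn : pvConn (pvEdges pairs) n y := (hRIx n y).mp hRy.symm
      obtain ⟨c', hc', hnc', hyc'⟩ := (h2 n y).mpr ⟨hconn, (hNT n).mp hn, (hNT y).mp hyN⟩
      obtain ⟨i, hi, rfl⟩ := List.mem_iff_getElem.mp hc'
      obtain ⟨k, hk, hkeq⟩ := List.mem_iff_getElem.mp hc₀
      by_cases hik : i = k
      · subst hik
        rw [← hkeq]
        exact hyc'
      · rw [← hkeq] at hnc₀
        exact absurd hnc₀ (h3 i k hi hk hik n hnc')
  have hV0 : ∀ y, y ∈ (PySem.Set.empty : PySem.Set String) ↔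
      y ∈ N ∧ R y ∈ ([] : PySem.Set String) := by
    intro y
    constructor
    · intro h; exact absurd h List.not_mem_nil
    · rintro ⟨_, h⟩; exact absurd h List.not_mem_nil
  show (N.foldl _ (PySem.Set.empty, [])).2 = _
  rw [pvEmitB comps R N hclassify N [] PySem.Set.empty [] (fun _ hn => hn) hV0]
  rfl

-- ===== VERDICT (by name: the statement is the Claim_ definition above) =====
theorem cluster_duplicates_py_spec : Claim_equal_cluster_duplicates_py := by
  intro pairs _ _
  show cluster_duplicates_py pairs = cluster_duplicates_py_alt pairs
  rw [pvAeq pairs, pvBeq pairs]
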